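-- pv_equiv track=rewrite | github.com/MylinDev/Private-Data-Identification-System | components/utils/masker.py | gerar_html_highlight
-- ===== SOURCE A (Python) =====
-- from typing import Dict, List
--
-- ENTITY_CONFIG = {
--     'cpf':                   {'label': '[CPF OCULTO]',              'color': '#FF4444'},
--     'rg':                    {'label': '[RG OCULTO]',               'color': '#FF6644'},
--     'cnh':                   {'label': '[CNH OCULTA]',              'color': '#FF6644'},
--     'titulo_eleitor':        {'label': '[TÍTULO OCULTO]',           'color': '#FF8844'},
--     'cnpj':                  {'label': '[CNPJ OCULTO]',             'color': '#FF4444'},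
--     'matricula':             {'label': '[MATRÍCULA OCULTA]',        'color': '#FFAA44'},
--     'data_nascimento':       {'label': '[DATA NASC. OCULTA]',       'color': '#FF8844'},
--     'filiacao':              {'label': '[FILIAÇÃO OCULTA]',         'color': '#FF8844'},
--     'assinatura':            {'label': '[ASSINATURA OCULTA]',       'color': '#FFAA44'},
--     'dados_bancarios':       {'label': '[DADOS BANCÁRIOS OCULTOS]', 'color': '#FF2222'},
--     'cartao_credito':        {'label': '[CARTÃO OCULTO]',           'color': '#FF2222'},
--     'email':                 {'label': '[EMAIL OCULTO]',            'color': '#44AAFF'},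
--     'telefone':              {'label': '[TELEFONE OCULTO]',         'color': '#44AAFF'},
--     'placa_veiculo':         {'label': '[PLACA OCULTA]',            'color': '#FFCC44'},
--     'endereco':              {'label': '[ENDEREÇO OCULTO]',         'color': '#FFCC44'},
--     'inscricao_imobiliaria': {'label': '[INSCRIÇÃO OCULTA]',        'color': '#FFCC44'},
--     'processo_sei':          {'label': '[PROCESSO SEI OCULTO]',     'color': '#AA88FF'},
--     'protocolo_lai':         {'label': '[PROTOCOLO LAI OCULTO]',    'color': '#AA88FF'},
--     'ocorrencia':            {'label': '[OCORRÊNCIA OCULTA]',       'color': '#AA88FF'},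
--     'processo_generico':     {'label': '[PROCESSO OCULTO]',         'color': '#AA88FF'},
--     'nomes':                 {'label': '[NOME OCULTO]',             'color': '#44DD88'},
--     'saude':                 {'label': '[DADO SAÚDE OCULTO]',       'color': '#FF66AA'},
-- }
--
-- def gerar_html_highlight(texto: str, entidades: Dict[str, List[str]]) -> str:
--     """Gera HTML com cada entidade destacada em sua cor correspondente."""
--     # Coleta todas as ocorrências com posição
--     marcacoes = []
--     for tipo, valores in entidades.items():
--         if tipo not in ENTITY_CONFIG or not valores:
--             continue
--         config = ENTITY_CONFIG[tipo]
--         for valor in valores: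
--             inicio = 0
--             while True:
--                 pos = texto.find(valor, inicio)
--                 if pos == -1:
--                     break
--                 marcacoes.append((pos, pos + len(valor), tipo, valor, config['color']))
--                 inicio = pos + 1
--
--     if not marcacoes:
--         return _escape_html(texto)
--
--     # Remove sobreposições mantendo a marcação mais longa
--     marcacoes.sort(key=lambda x: (x[0], -(x[1] - x[0])))
--     filtradas = []
--     ultimo_fim = 0
--     for m in marcacoes:
--         if m[0] >= ultimo_fim:
--             filtradas.append(m)
--             ultimo_fim = m[1]
--
--     # Constrói HTML
--     partes = []
--     pos_atual = 0
--     for inicio, fim, tipo, valor, cor in filtradas: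
--         if inicio > pos_atual:
--             partes.append(_escape_html(texto[pos_atual:inicio]))
--         label = ENTITY_CONFIG[tipo]['label']
--         partes.append(
--             f'<span style="background-color:{cor};color:#fff;padding:2px 6px;'
--             f'border-radius:4px;font-weight:bold" title="{label}">'
--             f'{_escape_html(valor)}</span>'
--         )
--         pos_atual = fim
--     if pos_atual < len(texto):
--         partes.append(_escape_html(texto[pos_atual:]))
--
--     return ''.join(partes)
--
-- def _escape_html(text: str) -> str:
--     """Escapa caracteres especiais para HTML."""
--     return (text
--             .replace('&', '&amp;')
--             .replace('<', '&lt;')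
--             .replace('>', '&gt;')
--             .replace('"', '&quot;'))
-- ===== SOURCE B (Python) =====
-- from typing import Dict, List
--
-- ENTITY_CONFIG = {
--     'cpf':                   {'label': '[CPF OCULTO]',              'color': '#FF4444'},
--     'rg':                    {'label': '[RG OCULTO]',               'color': '#FF6644'},
--     'cnh':                   {'label': '[CNH OCULTA]',              'color': '#FF6644'},
--     'titulo_eleitor':        {'label': '[TÍTULO OCULTO]',           'color': '#FF8844'},
--     'cnpj':                  {'label': '[CNPJ OCULTO]',             'color': '#FF4444'},
--     'matricula':             {'label': '[MATRÍCULA OCULTA]',        'color': '#FFAA44'},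
--     'data_nascimento':       {'label': '[DATA NASC. OCULTA]',       'color': '#FF8844'},
--     'filiacao':              {'label': '[FILIAÇÃO OCULTA]',         'color': '#FF8844'},
--     'assinatura':            {'label': '[ASSINATURA OCULTA]',       'color': '#FFAA44'},
--     'dados_bancarios':       {'label': '[DADOS BANCÁRIOS OCULTOS]', 'color': '#FF2222'},
--     'cartao_credito':        {'label': '[CARTÃO OCULTO]',           'color': '#FF2222'},
--     'email':                 {'label': '[EMAIL OCULTO]',            'color': '#44AAFF'},
--     'telefone':              {'label': '[TELEFONE OCULTO]',         'color': '#44AAFF'},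
--     'placa_veiculo':         {'label': '[PLACA OCULTA]',            'color': '#FFCC44'},
--     'endereco':              {'label': '[ENDEREÇO OCULTO]',         'color': '#FFCC44'},
--     'inscricao_imobiliaria': {'label': '[INSCRIÇÃO OCULTA]',        'color': '#FFCC44'},
--     'processo_sei':          {'label': '[PROCESSO SEI OCULTO]',     'color': '#AA88FF'},
--     'protocolo_lai':         {'label': '[PROTOCOLO LAI OCULTO]',    'color': '#AA88FF'},
--     'ocorrencia':            {'label': '[OCORRÊNCIA OCULTA]',       'color': '#AA88FF'},
--     'processo_generico':     {'label': '[PROCESSO OCULTO]',         'color': '#AA88FF'},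
--     'nomes':                 {'label': '[NOME OCULTO]',             'color': '#44DD88'},
--     'saude':                 {'label': '[DADO SAÚDE OCULTO]',       'color': '#FF66AA'},
-- }
--
-- def _escape_html(text: str) -> str:
--     return (text
--             .replace('&', '&amp;')
--             .replace('<', '&lt;')
--             .replace('>', '&gt;')
--             .replace('"', '&quot;'))
--
-- def gerar_html_highlight(texto: str, entidades: Dict[str, List[str]]) -> str:
--     """Single left-to-right scan: at each free position take the longest matching
--     value (first-listed wins ties) and emit its span; no sort, no overlap filter."""
--     pats = []
--     for tipo, valores in entidades.items():
--         cfg = ENTITY_CONFIG.get(tipo)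
--         if cfg:
--             for valor in valores:
--                 if valor:
--                     pats.append((valor, cfg['color'], cfg['label']))
--     out = []
--     n = len(texto)
--     plain = 0
--     i = 0
--     while i < n:
--         best = None
--         for valor, cor, label in pats:
--             if (best is None or len(valor) > len(best[0])) and texto.startswith(valor, i):
--                 best = (valor, cor, label)
--         if best is None:
--             i += 1
--         else:
--             valor, cor, label = best
--             out.append(_escape_html(texto[plain:i]))
--             out.append(
--                 f'<span style="background-color:{cor};color:#fff;padding:2px 6px;'
--                 f'border-radius:4px;font-weight:bold" title="{label}">'
--                 f'{_escape_html(valor)}</span>'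
--             )
--             i += len(valor)
--             plain = i
--     out.append(_escape_html(texto[plain:]))
--     return ''.join(out)
-- ===== Notes on version B (the rewrite author's own statement) =====
-- stated objective: alternative
-- what changed: A collects every occurrence of every value with repeated str.find, sorts all matches by (position, -length) and then filters overlaps greedily; B never materialises or sorts a match list: it scans the text left to right once and at each free position emits the longest value matching there (first-listed wins ties), advancing past it.
-- intended difference: On entidades that list an empty-string valor under a recognised tipo, A returns HTML with zero-width highlight spans (empty content) inserted at text positions -- an artefact of find('') matching everywhere; B ignores empty valores and highlights nothing there, which is what a maintainer would want since an empty value cannot be sensitive data. — e.g. on gerar_html_highlight("a", [("cpf", [""])]): A returns "<span style=\"background-color:#FF4444;color:#fff;padding:2px 6px;border-radius:4px;font-weight:bold\" title=\"[CPF OC…, B returns "a"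
import Mathlib
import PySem

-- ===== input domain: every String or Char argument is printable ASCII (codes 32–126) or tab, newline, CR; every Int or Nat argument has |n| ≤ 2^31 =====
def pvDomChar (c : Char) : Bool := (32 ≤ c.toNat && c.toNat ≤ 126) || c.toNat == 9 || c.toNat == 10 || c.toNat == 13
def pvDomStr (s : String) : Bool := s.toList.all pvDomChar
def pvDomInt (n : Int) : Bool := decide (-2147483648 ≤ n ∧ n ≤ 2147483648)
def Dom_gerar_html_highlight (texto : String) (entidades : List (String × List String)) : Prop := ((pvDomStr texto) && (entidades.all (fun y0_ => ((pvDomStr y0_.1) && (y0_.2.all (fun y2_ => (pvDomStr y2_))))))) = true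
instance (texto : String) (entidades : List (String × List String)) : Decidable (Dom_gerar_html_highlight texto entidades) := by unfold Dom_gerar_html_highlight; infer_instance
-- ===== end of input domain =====

-- B replaces A's find-all-matches + sort + overlap filter with a single left-to-right scan
-- that at each free position takes the longest matching value directly (objective: alternative).

-- ===== PORT A =====
-- ENTITY_CONFIG: tipo ↦ (label, color); the inner two-key dict is modelled as a pair.
def entityConfig : PySem.Dict String (String × String) := PySem.Dict.mk [
  ("cpf",                   ("[CPF OCULTO]",              "#FF4444")),
  ("rg",                    ("[RG OCULTO]",               "#FF6644")),
  ("cnh",                   ("[CNH OCULTA]",              "#FF6644")),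
  ("titulo_eleitor",        ("[TÍTULO OCULTO]",           "#FF8844")),
  ("cnpj",                  ("[CNPJ OCULTO]",             "#FF4444")),
  ("matricula",             ("[MATRÍCULA OCULTA]",        "#FFAA44")),
  ("data_nascimento",       ("[DATA NASC. OCULTA]",       "#FF8844")),
  ("filiacao",              ("[FILIAÇÃO OCULTA]",         "#FF8844")),
  ("assinatura",            ("[ASSINATURA OCULTA]",       "#FFAA44")),
  ("dados_bancarios",       ("[DADOS BANCÁRIOS OCULTOS]", "#FF2222")),
  ("cartao_credito",        ("[CARTÃO OCULTO]",           "#FF2222")),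
  ("email",                 ("[EMAIL OCULTO]",            "#44AAFF")),
  ("telefone",              ("[TELEFONE OCULTO]",         "#44AAFF")),
  ("placa_veiculo",         ("[PLACA OCULTA]",            "#FFCC44")),
  ("endereco",              ("[ENDEREÇO OCULTO]",         "#FFCC44")),
  ("inscricao_imobiliaria", ("[INSCRIÇÃO OCULTA]",        "#FFCC44")),
  ("processo_sei",          ("[PROCESSO SEI OCULTO]",     "#AA88FF")),
  ("protocolo_lai",         ("[PROTOCOLO LAI OCULTO]",    "#AA88FF")),
  ("ocorrencia",            ("[OCORRÊNCIA OCULTA]",       "#AA88FF")),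
  ("processo_generico",     ("[PROCESSO OCULTO]",         "#AA88FF")),
  ("nomes",                 ("[NOME OCULTO]",             "#44DD88")),
  ("saude",                 ("[DADO SAÚDE OCULTO]",       "#FF66AA"))]

-- _escape_html (shared helper: Source A and Source B define the identical function)
def escapeHtml (s : List Char) : List Char :=
  PySem.Chars.replace (PySem.Chars.replace (PySem.Chars.replace
    (PySem.Chars.replace s ['&'] "&amp;".toList)
    ['<'] "&lt;".toList) ['>'] "&gt;".toList) ['"'] "&quot;".toList

-- the f-string of the span (identical in Source A and Source B)
def spanHtml (cor label : String) (valor : List Char) : List Char :=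
  "<span style=\"background-color:".toList ++ cor.toList ++
  ";color:#fff;padding:2px 6px;border-radius:4px;font-weight:bold\" title=\"".toList ++
  label.toList ++ "\">".toList ++ escapeHtml valor ++ "</span>".toList

-- termination facts for A's `while True: pos = texto.find(valor, inicio)` loop
lemma findFrom_of_len_lt (s sub : List Char) (st : Int) (h0 : 0 ≤ st)
    (hlt : (s.length : Int) < st) : PySem.Chars.findFrom s sub st none = -1 := by
  simp [PySem.Chars.findFrom, show ¬ st < 0 by omega, hlt]

lemma findFrom_pos_facts_nonneg (s sub : List Char) (st : Int) (h0 : 0 ≤ st)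
    (h : ¬ PySem.Chars.findFrom s sub st none = -1) :
    st < PySem.Chars.findFrom s sub st none + 1 ∧ st ≤ (s.length : Int) ∧
    0 ≤ PySem.Chars.findFrom s sub st none ∧
    PySem.Chars.findFrom s sub st none ≤ (s.length : Int) := by
  by_cases hlen : (s.length : Int) < st
  · exact absurd (findFrom_of_len_lt s sub st h0 hlen) h
  · have hk : st.toNat ≤ s.length := by omega
    have hcast : ((st.toNat : Nat) : Int) = st := by omega
    rw [← hcast] at h ⊢
    rw [PySem.Chars.findFrom_natCast s sub st.toNat hk] at h ⊢
    have h5 := PySem.Chars.neg_one_le_find (List.drop st.toNat s) sub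
    have h6 := PySem.Chars.find_le_length (List.drop st.toNat s) sub
    simp only [List.length_drop] at h6
    split_ifs at h ⊢ with hr
    · exact absurd rfl h
    · refine ⟨by omega, by omega, by omega, by omega⟩

lemma findFrom_pos_facts (s sub : List Char) (st : Int)
    (h : ¬ PySem.Chars.findFrom s sub st none = -1) :
    st < PySem.Chars.findFrom s sub st none + 1 ∧ st ≤ (s.length : Int) ∧
    0 ≤ PySem.Chars.findFrom s sub st none ∧
    PySem.Chars.findFrom s sub st none ≤ (s.length : Int) := by
  by_cases hneg : st < 0
  · have hn0 : (0 : Int) ≤ (s.length : Int) := by positivity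
    by_cases h2 : st + (s.length : Int) < 0
    · have he : PySem.Chars.findFrom s sub st none = PySem.Chars.findFrom s sub 0 none := by
        simp [PySem.Chars.findFrom, hneg, h2]
      rw [he] at h ⊢
      have hf := findFrom_pos_facts_nonneg s sub 0 le_rfl h
      exact ⟨by omega, by omega, by omega, by omega⟩
    · have he : PySem.Chars.findFrom s sub st none
          = PySem.Chars.findFrom s sub (st + (s.length : Int)) none := by
        simp [PySem.Chars.findFrom, hneg, h2, show ¬ st + (s.length : Int) < 0 from h2]
      rw [he] at h ⊢
      have hf := findFrom_pos_facts_nonneg s sub (st + (s.length : Int)) (by omega) h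
      exact ⟨by omega, by omega, by omega, by omega⟩
  · exact findFrom_pos_facts_nonneg s sub st (by omega) h

-- the `inicio = 0; while True: pos = texto.find(valor, inicio); …; inicio = pos + 1` loop:
-- collects the marcações (pos, pos + len(valor), tipo, valor, cor) for one valor
def occsA (text valor : List Char) (tipo cor : String) (inicio : Int) :
    List (Int × Int × String × List Char × String) :=
  let pos := PySem.Chars.findFrom text valor inicio none
  if h : pos = -1 then []
  else (pos, pos + (valor.length : Int), tipo, valor, cor) :: occsA text valor tipo cor (pos + 1)
termination_by (text.length + 1) - inicio.toNat
decreasing_by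
  have := findFrom_pos_facts text valor inicio h
  omega

def gerar_html_highlight (texto : String) (entidades : List (String × List String)) : String :=
  let text := texto.toList
  let marcacoes : List (Int × Int × String × List Char × String) :=
    entidades.foldl (fun acc tv =>
      if !(PySem.Dict.contains entityConfig tv.1) || tv.2.isEmpty then acc
      else
        let config := PySem.Dict.getD entityConfig tv.1 ("", "")
        tv.2.foldl (fun acc2 valor => acc2 ++ occsA text valor.toList tv.1 config.2 0) acc) []
  if marcacoes.isEmpty then String.ofList (escapeHtml text)
  else
    let srt := PySem.List.sorted2 marcacoes (fun x => x.1) (fun x => -(x.2.1 - x.1)) false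
    let fr := srt.foldl
      (fun (st : List (Int × Int × String × List Char × String) × Int) m =>
        if m.1 ≥ st.2 then (st.1 ++ [m], m.2.1) else st) ([], 0)
    let br := fr.1.foldl
      (fun (st : List (List Char) × Int) m =>
        let partes := if m.1 > st.2 then
            st.1 ++ [escapeHtml (PySem.List.slice text (some st.2) (some m.1))] else st.1
        let label := (PySem.Dict.getD entityConfig m.2.2.1 ("", "")).1
        (partes ++ [spanHtml m.2.2.2.2 label m.2.2.2.1], m.2.1)) ([], 0)
    let partes := if br.2 < (text.length : Int) then
        br.1 ++ [escapeHtml (PySem.List.slice text (some br.2) none)] else br.1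
    String.ofList (PySem.Chars.join [] partes)

-- ===== PORT B =====
-- the inner `for valor, cor, label in pats` best-match fold at position i
def bestMatch (text : List Char) (pats : List (List Char × String × String)) (i : Nat) :
    Option (List Char × String × String) :=
  pats.foldl (fun best p =>
    match best with
    | none => if PySem.Chars.startswith (text.drop i) p.1 then some p else none
    | some b =>
        if decide (p.1.length > b.1.length) && PySem.Chars.startswith (text.drop i) p.1
        then some p else some b) none

lemma bestMatch_mem {text : List Char} {pats : List (List Char × String × String)} {i : Nat}
    {p : List Char × String × String} (h : bestMatch text pats i = some p) : p ∈ pats := by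
  unfold bestMatch at h
  suffices H : ∀ (acc : Option (List Char × String × String)),
      pats.foldl (fun best p =>
        match best with
        | none => if PySem.Chars.startswith (text.drop i) p.1 then some p else none
        | some b =>
            if decide (p.1.length > b.1.length) && PySem.Chars.startswith (text.drop i) p.1
            then some p else some b) acc = some p →
      (acc = some p ∨ p ∈ pats) by
    rcases H none h with h' | h'
    · simp at h'
    · exact h'
  clear h
  induction pats with
  | nil => intro acc h; exact Or.inl h
  | cons q t ih =>
      intro acc h
      simp only [List.foldl_cons] at h
      rcases ih _ h with h' | h'
      · cases acc with
        | none =>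
            by_cases hs : PySem.Chars.startswith (text.drop i) q.1 = true
            · simp only [hs, if_true, Option.some.injEq] at h'
              right; rw [← h']; exact List.mem_cons_self ..
            · simp [hs] at h'
        | some b =>
            by_cases hc : (decide (q.1.length > b.1.length) && PySem.Chars.startswith (text.drop i) q.1) = true
            · simp only [hc, if_true, Option.some.injEq] at h'
              right; rw [← h']; exact List.mem_cons_self ..
            · simp only [hc, Bool.false_eq_true, if_false, Option.some.injEq] at h'
              left; rw [h']
      · right; exact List.mem_cons_of_mem _ h'

-- the `while i < n:` loop of B; `hp` records that pats holds no empty valor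
-- (B filters them out when building pats), which bounds the loop
def bScan (text : List Char) (pats : List (List Char × String × String))
    (hp : ∀ p ∈ pats, p.1 ≠ []) (i plain : Nat) (out : List (List Char)) : List (List Char) :=
  if h : i < text.length then
    match hb : bestMatch text pats i with
    | none => bScan text pats hp (i + 1) plain out
    | some p =>
        bScan text pats hp (i + p.1.length) (i + p.1.length)
          (out ++ [escapeHtml (PySem.List.slice text (some (plain : Int)) (some (i : Int))),
                   spanHtml p.2.1 p.2.2 p.1])
  else out ++ [escapeHtml (PySem.List.slice text (some (plain : Int)) none)]
termination_by text.length - i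
decreasing_by
  · omega
  · have hm := bestMatch_mem hb
    have := hp p hm
    have : 0 < p.1.length := List.length_pos_iff.mpr this
    omega

lemma patsB_nonempty (entidades : List (String × List String)) :
    ∀ p ∈ entidades.foldl (fun acc tv =>
        match PySem.Dict.get? entityConfig tv.1 with
        | some cfg => tv.2.foldl
            (fun acc2 v => if v == "" then acc2 else acc2 ++ [(v.toList, cfg.2, cfg.1)]) acc
        | none => acc) ([] : List (List Char × String × String)), p.1 ≠ [] := by
  suffices H : ∀ (l : List (String × List String)) (acc : List (List Char × String × String)),
      (∀ p ∈ acc, p.1 ≠ []) → ∀ p ∈ l.foldl (fun acc tv =>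
        match PySem.Dict.get? entityConfig tv.1 with
        | some cfg => tv.2.foldl
            (fun acc2 v => if v == "" then acc2 else acc2 ++ [(v.toList, cfg.2, cfg.1)]) acc
        | none => acc) acc, p.1 ≠ [] by
    intro p hp; exact H entidades [] (by simp) p hp
  intro l
  induction l with
  | nil => intro acc hacc; simpa using hacc
  | cons tv t ih =>
      intro acc hacc
      simp only [List.foldl_cons]
      cases hcf : PySem.Dict.get? entityConfig tv.1 with
      | none => exact ih acc hacc
      | some cfg =>
          apply ih
          suffices H2 : ∀ (vs : List String) (acc2 : List (List Char × String × String)),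
              (∀ p ∈ acc2, p.1 ≠ []) → ∀ p ∈ vs.foldl
                (fun acc2 v => if v == "" then acc2 else acc2 ++ [(v.toList, cfg.2, cfg.1)]) acc2,
              p.1 ≠ [] from H2 tv.2 acc hacc
          intro vs
          induction vs with
          | nil => intro acc2 h2; simpa using h2
          | cons v vt ihv =>
              intro acc2 h2
              simp only [List.foldl_cons]
              by_cases hv : v == ""
              · simp only [hv, if_true]; exact ihv acc2 h2
              · simp only [hv, Bool.false_eq_true, if_false]
                apply ihv
                intro p hp
                rcases List.mem_append.mp hp with hp | hp
                · exact h2 p hp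
                · simp only [List.mem_singleton] at hp
                  subst hp
                  simp only [ne_eq]
                  intro hnil
                  exact hv (by simp [String.toList_eq_nil_iff.mp hnil])

def gerar_html_highlight_alt (texto : String) (entidades : List (String × List String)) : String :=
  let text := texto.toList
  let pats : List (List Char × String × String) :=
    entidades.foldl (fun acc tv =>
      match PySem.Dict.get? entityConfig tv.1 with
      | some cfg => tv.2.foldl
          (fun acc2 v => if v == "" then acc2 else acc2 ++ [(v.toList, cfg.2, cfg.1)]) acc
      | none => acc) []
  String.ofList (PySem.Chars.join [] (bScan text pats (patsB_nonempty entidades) 0 0 []))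

-- ===== PRECONDITION & SPEC =====
-- Pre_ excludes association lists with duplicate tipo keys: the argument is a Python dict,
-- which cannot carry duplicate keys (Python collapses them before A ever runs), so the
-- assoc-list ports would not correspond to either Python there.
def Pre_gerar_html_highlight (texto : String) (entidades : List (String × List String)) : Prop :=
  (entidades.map Prod.fst).Nodup
instance (texto : String) (entidades : List (String × List String)) :
    Decidable (Pre_gerar_html_highlight texto entidades) := by
  unfold Pre_gerar_html_highlight; infer_instance

def pvWitness_gerar_html_highlight : String × (List (String × List String)) :=
  ("meu cpf 123", [("cpf", ["123"]), ("nomes", ["meu"])])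

-- On entidades that list an empty-string valor under a tipo present in ENTITY_CONFIG, A emits
-- zero-width highlight spans (with empty content) at text positions, an artefact of `find`
-- matching '' everywhere; B ignores empty valores and highlights nothing there, which is the
-- intended behaviour (an empty value cannot be sensitive data). The condition is a plain
-- membership test on the input against the module's ENTITY_CONFIG table.
def D_gerar_html_highlight (texto : String) (entidades : List (String × List String)) : Prop :=
  ∃ p ∈ entidades, PySem.Dict.contains entityConfig p.1 = true ∧ "" ∈ p.2
instance (texto : String) (entidades : List (String × List String)) :
    Decidable (D_gerar_html_highlight texto entidades) := by
  unfold D_gerar_html_highlight; infer_instance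

def Spec_gerar_html_highlight (texto : String) (entidades : List (String × List String))
    (out : String) : Prop :=
  ¬ D_gerar_html_highlight texto entidades → out = gerar_html_highlight_alt texto entidades
instance (texto : String) (entidades : List (String × List String)) (out : String) :
    Decidable (Spec_gerar_html_highlight texto entidades out) := by
  unfold Spec_gerar_html_highlight; infer_instance

def pvDiffWitness_gerar_html_highlight : String × (List (String × List String)) :=
  ("a", [("cpf", [""])])
def pvDiffWitnessOut_gerar_html_highlight : String × String :=
  ("<span style=\"background-color:#FF4444;color:#fff;padding:2px 6px;border-radius:4px;font-weight:bold\" title=\"[CPF OCULTO]\"></span>a<span style=\"background-color:#FF4444;color:#fff;padding:2px 6px;border-radius:4px;font-weight:bold\" title=\"[CPF OCULTO]\"></span>",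
   "a")

-- ===== CLAIM (what is proved, stated in full; the proofs are below) =====
def Claim_unchanged_gerar_html_highlight : Prop :=
  ∀ (texto : String) (entidades : List (String × List String)),
    Dom_gerar_html_highlight texto entidades → Pre_gerar_html_highlight texto entidades →
    Spec_gerar_html_highlight texto entidades (gerar_html_highlight texto entidades)
def Claim_changed_gerar_html_highlight : Prop :=
  Dom_gerar_html_highlight (pvDiffWitness_gerar_html_highlight.1) (pvDiffWitness_gerar_html_highlight.2) ∧
  Pre_gerar_html_highlight (pvDiffWitness_gerar_html_highlight.1) (pvDiffWitness_gerar_html_highlight.2) ∧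
  D_gerar_html_highlight (pvDiffWitness_gerar_html_highlight.1) (pvDiffWitness_gerar_html_highlight.2) ∧
  gerar_html_highlight (pvDiffWitness_gerar_html_highlight.1) (pvDiffWitness_gerar_html_highlight.2) = pvDiffWitnessOut_gerar_html_highlight.1 ∧
  gerar_html_highlight_alt (pvDiffWitness_gerar_html_highlight.1) (pvDiffWitness_gerar_html_highlight.2) = pvDiffWitnessOut_gerar_html_highlight.2 ∧
  pvDiffWitnessOut_gerar_html_highlight.1 ≠ pvDiffWitnessOut_gerar_html_highlight.2
def Claim_exact_gerar_html_highlight : Prop :=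
  ∀ (texto : String) (entidades : List (String × List String)),
    Dom_gerar_html_highlight texto entidades → Pre_gerar_html_highlight texto entidades →
    D_gerar_html_highlight texto entidades →
    gerar_html_highlight texto entidades ≠ gerar_html_highlight_alt texto entidades

-- ===== LEMMAS AND PROOFS =====

-- ---------- shared abbreviations-by-hand: A-side pats carry (tipo, valor, cor, label) ----------
def pvForget (q : String × List Char × String × String) : List Char × String × String :=
  (q.2.1, q.2.2.1, q.2.2.2)

def pvApats (entidades : List (String × List String)) :
    List (String × List Char × String × String) :=
  entidades.flatMap (fun tv =>
    match PySem.Dict.get? entityConfig tv.1 with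
    | some cfg => (tv.2.filter (fun v => !(v == ""))).map (fun v => (tv.1, v.toList, cfg.2, cfg.1))
    | none => [])

def pvMarkOf (iq : Nat × (String × List Char × String × String)) :
    Int × Int × String × List Char × String :=
  ((iq.1 : Int), (iq.1 : Int) + iq.2.2.1.length, iq.2.1, iq.2.2.1, iq.2.2.2.1)

def pvMarks (text : List Char) (pats : List (String × List Char × String × String)) :
    List (Int × Int × String × List Char × String) :=
  pats.flatMap (fun q => occsA text q.2.1 q.1 q.2.2.1 0)

def pvValid (text : List Char) (pats : List (String × List Char × String × String))
    (m : Int × Int × String × List Char × String) : Prop :=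
  ∃ q ∈ pats, ∃ j : Nat, j ≤ text.length ∧ q.2.1 <+: text.drop j ∧ m = pvMarkOf (j, q)

def pvStepA (text : List Char) (i : Nat)
    (best : Option (String × List Char × String × String))
    (q : String × List Char × String × String) :
    Option (String × List Char × String × String) :=
  match best with
  | none => if PySem.Chars.startswith (text.drop i) q.2.1 then some q else none
  | some b =>
      if decide (q.2.1.length > b.2.1.length) && PySem.Chars.startswith (text.drop i) q.2.1
      then some q else some b

def pvBestA (text : List Char) (pats : List (String × List Char × String × String)) (i : Nat) :
    Option (String × List Char × String × String) :=
  pats.foldl (pvStepA text i) none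

lemma pvBestA_mem {text : List Char} {pats : List (String × List Char × String × String)}
    {i : Nat} {q : String × List Char × String × String}
    (h : pvBestA text pats i = some q) : q ∈ pats := by
  unfold pvBestA at h
  suffices H : ∀ (acc : Option (String × List Char × String × String)),
      pats.foldl (pvStepA text i) acc = some q → (acc = some q ∨ q ∈ pats) by
    rcases H none h with h' | h'
    · simp at h'
    · exact h'
  clear h
  induction pats with
  | nil => intro acc h; exact Or.inl h
  | cons r t ih =>
      intro acc h
      simp only [List.foldl_cons] at h
      rcases ih _ h with h' | h'
      · cases acc with
        | none =>
            rw [show pvStepA text i none r =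
              (if PySem.Chars.startswith (text.drop i) r.2.1 then some r else none) from rfl] at h'
            by_cases hs : PySem.Chars.startswith (text.drop i) r.2.1 = true
            · rw [if_pos hs] at h'
              right; rw [← Option.some_inj.mp h']; exact List.mem_cons_self ..
            · rw [if_neg hs] at h'
              simp at h' 
        | some b =>
            rw [show pvStepA text i (some b) r =
              (if decide (r.2.1.length > b.2.1.length) && PySem.Chars.startswith (text.drop i) r.2.1
               then some r else some b) from rfl] at h'
            split_ifs at h' with hs
            · right; rw [← Option.some_inj.mp h']; exact List.mem_cons_self ..
            · exact Or.inl h'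
      · right; exact List.mem_cons_of_mem _ h'

def pvSelA (text : List Char) (pats : List (String × List Char × String × String))
    (hp : ∀ q ∈ pats, q.2.1 ≠ []) (u : Nat) :
    List (Nat × (String × List Char × String × String)) :=
  if h : u < text.length then
    match hb : pvBestA text pats u with
    | some q => (u, q) :: pvSelA text pats hp (u + q.2.1.length)
    | none => pvSelA text pats hp (u + 1)
  else []
termination_by text.length - u
decreasing_by
  · have hm := pvBestA_mem hb
    have := hp q hm
    have : 0 < q.2.1.length := List.length_pos_iff.mpr this
    omega
  · omega

lemma pvSelA_stop_eq (text : List Char) (pats : List (String × List Char × String × String))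
    (hp : ∀ q ∈ pats, q.2.1 ≠ []) (u : Nat) (h : ¬ u < text.length) :
    pvSelA text pats hp u = [] := by
  rw [pvSelA.eq_def, dif_neg h]

lemma pvSelA_none_eq (text : List Char) (pats : List (String × List Char × String × String))
    (hp : ∀ q ∈ pats, q.2.1 ≠ []) (u : Nat) (h : u < text.length)
    (hb : pvBestA text pats u = none) :
    pvSelA text pats hp u = pvSelA text pats hp (u + 1) := by
  rw [pvSelA.eq_def, dif_pos h]
  split
  · rename_i q' hq'
    rw [hb] at hq'
    simp at hq'
  · rfl

lemma pvSelA_cons_eq (text : List Char) (pats : List (String × List Char × String × String))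
    (hp : ∀ q ∈ pats, q.2.1 ≠ []) (u : Nat) (q : String × List Char × String × String)
    (h : u < text.length) (hb : pvBestA text pats u = some q) :
    pvSelA text pats hp u = (u, q) :: pvSelA text pats hp (u + q.2.1.length) := by
  rw [pvSelA.eq_def, dif_pos h]
  split
  · rename_i q' hq'
    rw [hb] at hq'
    rw [← Option.some_inj.mp hq']
  · rename_i hq'
    rw [hb] at hq'
    simp at hq'

def pvChunks (text : List Char) :
    Nat → List (Nat × (String × List Char × String × String)) → List Char
  | u, [] => escapeHtml (text.drop u)
  | u, (i, q) :: rest =>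
      escapeHtml ((text.drop u).take (i - u)) ++ spanHtml q.2.2.1 q.2.2.2 q.2.1 ++
      pvChunks text (i + q.2.1.length) rest

def pvGreedy : List (Int × Int × String × List Char × String) → Int →
    List (Int × Int × String × List Char × String)
  | [], _ => []
  | m :: t, u => if m.1 ≥ u then m :: pvGreedy t m.2.1 else pvGreedy t u

-- strict lexicographic "before" of A's sort key, as PySem.List.sorted2 builds it
def pvSLt {α : Type} (k1 k2 : α → Int) (a b : α) : Bool :=
  decide (k1 a < k1 b) || (!decide (k1 b < k1 a) && decide (k2 a < k2 b))

-- sortedness + stability invariant of the insertion sort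
def pvSRel {α : Type} (k1 k2 : α → Int) (T : α → α → Prop) (a b : α) : Prop :=
  pvSLt k1 k2 b a = false ∧ (k1 a = k1 b ∧ k2 a = k2 b → T a b)

lemma pvSLt_true_iff {α : Type} (k1 k2 : α → Int) (a b : α) :
    pvSLt k1 k2 a b = true ↔ (k1 a < k1 b ∨ (¬ k1 b < k1 a ∧ k2 a < k2 b)) := by
  simp [pvSLt]

lemma pvSLt_false_iff {α : Type} (k1 k2 : α → Int) (a b : α) :
    pvSLt k1 k2 a b = false ↔ ¬ (k1 a < k1 b ∨ (¬ k1 b < k1 a ∧ k2 a < k2 b)) := by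
  rw [← pvSLt_true_iff k1 k2 a b]
  simp

lemma pvSorted2_eq {α : Type} (xs : List α) (k1 k2 : α → Int) :
    PySem.List.sorted2 xs k1 k2 false =
    xs.foldl (fun acc x => PySem.List.insertBy (pvSLt k1 k2) x acc) [] := rfl

lemma pvInsertBy_S {α : Type} (k1 k2 : α → Int) (T : α → α → Prop) (x : α) :
    ∀ (acc : List α), acc.Pairwise (pvSRel k1 k2 T) →
    (∀ y ∈ acc, k1 y = k1 x ∧ k2 y = k2 x → T y x) →
    (PySem.List.insertBy (pvSLt k1 k2) x acc).Pairwise (pvSRel k1 k2 T) := by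
  intro acc
  induction acc with
  | nil =>
      intro _ _
      have e : PySem.List.insertBy (pvSLt k1 k2) x [] = [x] := rfl
      rw [e]; exact List.pairwise_singleton _ _
  | cons y ys ih =>
      intro hacc hx
      have e : PySem.List.insertBy (pvSLt k1 k2) x (y :: ys) =
          if pvSLt k1 k2 x y then x :: y :: ys else y :: PySem.List.insertBy (pvSLt k1 k2) x ys := rfl
      rw [e]
      rcases List.pairwise_cons.mp hacc with ⟨hy, hys⟩
      by_cases hb : pvSLt k1 k2 x y = true
      · rw [if_pos hb]
        rw [pvSLt_true_iff] at hb
        refine List.pairwise_cons.mpr ⟨?_, hacc⟩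
        intro z hz
        rcases List.mem_cons.mp hz with rfl | hz
        · refine ⟨?_, ?_⟩
          · rw [pvSLt_false_iff]; omega
          · rintro ⟨e1, e2⟩; exfalso; omega
        · have hyz := hy z hz
          have hzy := hyz.1
          rw [pvSLt_false_iff] at hzy
          refine ⟨?_, ?_⟩
          · rw [pvSLt_false_iff]; omega
          · rintro ⟨e1, e2⟩; exfalso; omega
      · have hb' : pvSLt k1 k2 x y = false := by simpa using hb
        rw [if_neg hb]
        refine List.pairwise_cons.mpr ⟨?_, ih hys (fun z hz hk => hx z (List.mem_cons_of_mem _ hz) hk)⟩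
        intro z hz
        rcases (PySem.List.mem_insertBy _ _ _ _).mp hz with rfl | hz
        · exact ⟨hb', fun hk => hx y (List.mem_cons_self ..) ⟨hk.1, hk.2⟩⟩
        · exact hy z hz

lemma pvFoldl_insertBy_S {α : Type} (k1 k2 : α → Int) (T : α → α → Prop) :
    ∀ (xs acc : List α), xs.Pairwise (fun a b => k1 a = k1 b ∧ k2 a = k2 b → T a b) →
    acc.Pairwise (pvSRel k1 k2 T) →
    (∀ y ∈ acc, ∀ x ∈ xs, k1 y = k1 x ∧ k2 y = k2 x → T y x) →
    (xs.foldl (fun acc x => PySem.List.insertBy (pvSLt k1 k2) x acc) acc).Pairwise (pvSRel k1 k2 T) := by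
  intro xs
  induction xs with
  | nil => intro acc _ hacc _; simpa using hacc
  | cons x t ih =>
      intro acc h hacc hcross
      rcases List.pairwise_cons.mp h with ⟨hxh, ht⟩
      simp only [List.foldl_cons]
      apply ih _ ht
      · exact pvInsertBy_S k1 k2 T x acc hacc
          (fun y hy hk => hcross y hy x (List.mem_cons_self ..) hk)
      · intro y hy x' hx' hk
        rcases (PySem.List.mem_insertBy _ _ _ _).mp hy with rfl | hy
        · exact hxh x' hx' hk
        · exact hcross y hy x' (List.mem_cons_of_mem _ hx') hk

lemma pvSorted2_S {α : Type} (xs : List α) (k1 k2 : α → Int) (T : α → α → Prop)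
    (h : xs.Pairwise (fun a b => k1 a = k1 b ∧ k2 a = k2 b → T a b)) :
    (PySem.List.sorted2 xs k1 k2 false).Pairwise (pvSRel k1 k2 T) := by
  rw [pvSorted2_eq]
  exact pvFoldl_insertBy_S k1 k2 T xs [] h (by simp) (by simp)

-- ---------- occurrences ----------
lemma occsA_mem (text v : List Char) (tipo cor : String) :
    ∀ (k : Int), 0 ≤ k → ∀ (m : Int × Int × String × List Char × String),
      (m ∈ occsA text v tipo cor k ↔
        ∃ j : Nat, k ≤ (j : Int) ∧ j ≤ text.length ∧ v <+: text.drop j ∧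
          m = ((j : Int), (j : Int) + v.length, tipo, v, cor)) := by
  intro k
  induction k using occsA.induct (text := text) (valor := v) with
  | case1 k pos0 hpos0 =>
      intro hk m
      have hp0 : pos0 = PySem.Chars.findFrom text v k none := rfl
      have hpos : PySem.Chars.findFrom text v k none = -1 := hp0 ▸ hpos0
      rw [occsA.eq_def]
      dsimp only
      rw [dif_pos hpos]
      simp only [List.not_mem_nil, false_iff]
      rintro ⟨j, hkj, hjn, hpre, -⟩
      by_cases hkn : k ≤ (text.length : Int)
      · have hk' : k.toNat ≤ text.length := by omega
        have hcast : ((k.toNat : Nat) : Int) = k := by omega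
        rw [← hcast] at hpos
        have hni := (PySem.Chars.findFrom_natCast_eq_neg_one_iff text v k.toNat hk').mp hpos
        apply hni
        have hjk : k.toNat ≤ j := by omega
        have hs : text.drop j <:+ text.drop k.toNat := by
          have hdd : text.drop j = (text.drop k.toNat).drop (j - k.toNat) := by
            rw [List.drop_drop]; congr 1; omega
          rw [hdd]
          exact List.drop_suffix _ _
        exact hpre.isInfix.trans hs.isInfix
      · omega
  | case2 k pos0 hpos0 ih0 =>
      intro hk m
      have hp0 : pos0 = PySem.Chars.findFrom text v k none := rfl
      have hpos : ¬ PySem.Chars.findFrom text v k none = -1 := hp0 ▸ hpos0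
      rw [occsA.eq_def]
      dsimp only
      rw [dif_neg hpos]
      have hfacts := findFrom_pos_facts text v k hpos
      rw [← hp0] at hfacts ⊢
      have ih := ih0
      rw [hp0] at hpos0
      set pos := pos0 with hposdef
      have hk' : k.toNat ≤ text.length := by omega
      have hcast : ((k.toNat : Nat) : Int) = k := by omega
      have hspec := PySem.Chars.findFrom_natCast_spec text v k.toNat hk'
        (by rw [hcast]; exact hpos0)
      rw [hcast, ← hp0] at hspec
      rcases hspec with ⟨hge, hpre, hmin⟩
      have hposnn : 0 ≤ pos := hfacts.2.2.1
      have hposlen : pos ≤ (text.length : Int) := hfacts.2.2.2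
      constructor
      · intro hm
        rcases List.mem_cons.mp hm with rfl | hm
        · refine ⟨pos.toNat, by omega, by omega, hpre, ?_⟩
          have hc2 : ((pos.toNat : Nat) : Int) = pos := by omega
          rw [hc2]
        · rcases (ih (by omega) m).mp hm with ⟨j, hj1, hj2, hj3, hj4⟩
          exact ⟨j, by omega, hj2, hj3, hj4⟩
      · rintro ⟨j, hj1, hj2, hj3, hj4⟩
        rcases lt_trichotomy j pos.toNat with hlt | heq | hgt
        · exact absurd hj3 (hmin j (by omega) hlt)
        · subst heq
          apply List.mem_cons.mpr
          left
          rw [hj4]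
          have hc2 : ((pos.toNat : Nat) : Int) = pos := by omega
          rw [hc2]
        · apply List.mem_cons_of_mem
          exact (ih (by omega) m).mpr ⟨j, by omega, hj2, hj3, hj4⟩

lemma pvMarks_mem (text : List Char) (pats : List (String × List Char × String × String))
    (m : Int × Int × String × List Char × String) :
    m ∈ pvMarks text pats ↔ pvValid text pats m := by
  unfold pvMarks pvValid
  rw [List.mem_flatMap]
  constructor
  · rintro ⟨q, hq, hm⟩
    rcases (occsA_mem text q.2.1 q.1 q.2.2.1 0 le_rfl m).mp hm with ⟨j, _, hj2, hj3, hj4⟩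
    exact ⟨q, hq, j, hj2, hj3, by rw [hj4]; rfl⟩
  · rintro ⟨q, hq, j, hj2, hj3, hj4⟩
    refine ⟨q, hq, (occsA_mem text q.2.1 q.1 q.2.2.1 0 le_rfl m).mpr
      ⟨j, by positivity, hj2, hj3, by rw [hj4]; rfl⟩⟩

-- ---------- building the two pats lists ----------
lemma pvPatsB_eq (entidades : List (String × List String)) :
    entidades.foldl (fun acc tv =>
      match PySem.Dict.get? entityConfig tv.1 with
      | some cfg => tv.2.foldl
          (fun acc2 v => if v == "" then acc2 else acc2 ++ [(v.toList, cfg.2, cfg.1)]) acc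
      | none => acc) [] = (pvApats entidades).map pvForget := by
  suffices H : ∀ (e : List (String × List String)) (acc : List (List Char × String × String)),
      e.foldl (fun acc tv =>
        match PySem.Dict.get? entityConfig tv.1 with
        | some cfg => tv.2.foldl
            (fun acc2 v => if v == "" then acc2 else acc2 ++ [(v.toList, cfg.2, cfg.1)]) acc
        | none => acc) acc = acc ++ (pvApats e).map pvForget by
    simpa using H entidades []
  intro e
  induction e with
  | nil => intro acc; simp [pvApats]
  | cons tv t ih =>
      intro acc
      simp only [List.foldl_cons]
      cases hcf : PySem.Dict.get? entityConfig tv.1 with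
      | none =>
          dsimp only
          rw [ih]
          simp [pvApats, List.flatMap_cons, hcf]
      | some cfg =>
          dsimp only
          have hstep : (fun (acc2 : List (List Char × String × String)) (v : String) =>
              if v == "" then acc2 else acc2 ++ [(v.toList, cfg.2, cfg.1)]) =
              (fun acc2 v => if !(v == "") then acc2 ++ [(v.toList, cfg.2, cfg.1)] else acc2) := by
            funext acc2 v
            by_cases h : v == "" <;> simp [h]
          rw [hstep, PySem.List.foldl_append_if, ih]
          simp only [pvApats, List.flatMap_cons, hcf, List.map_append, List.map_map,
            List.append_assoc]
          simp [Function.comp, pvForget]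

lemma pvMarcacoes_eq (text : List Char) (entidades : List (String × List String))
    (hD : ¬ ∃ p ∈ entidades, PySem.Dict.contains entityConfig p.1 = true ∧ "" ∈ p.2) :
    entidades.foldl (fun acc tv =>
      if !(PySem.Dict.contains entityConfig tv.1) || tv.2.isEmpty then acc
      else tv.2.foldl (fun acc2 valor =>
        acc2 ++ occsA text valor.toList tv.1 (PySem.Dict.getD entityConfig tv.1 ("", "")).2 0) acc) []
    = pvMarks text (pvApats entidades) := by
  push_neg at hD
  suffices H : ∀ (e : List (String × List String)),
      (∀ p ∈ e, PySem.Dict.contains entityConfig p.1 = true → "" ∉ p.2) →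
      ∀ (acc : List (Int × Int × String × List Char × String)),
      e.foldl (fun acc tv =>
        if !(PySem.Dict.contains entityConfig tv.1) || tv.2.isEmpty then acc
        else tv.2.foldl (fun acc2 valor =>
          acc2 ++ occsA text valor.toList tv.1 (PySem.Dict.getD entityConfig tv.1 ("", "")).2 0) acc) acc
      = acc ++ pvMarks text (pvApats e) by
    have := H entidades (fun p hp hk => by
      intro hmem; exact (hD p hp hk) hmem) []
    simpa using this
  intro e
  induction e with
  | nil => intro _ acc; simp [pvApats, pvMarks]
  | cons tv t ih =>
      intro hno acc
      have hnot := ih (fun p hp => hno p (List.mem_cons_of_mem _ hp))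
      simp only [List.foldl_cons]
      by_cases hc : PySem.Dict.contains entityConfig tv.1 = true
      · have hget : ∃ cfg, PySem.Dict.get? entityConfig tv.1 = some cfg := by
          simp only [PySem.Dict.contains] at hc
          rcases List.any_eq_true.mp hc with ⟨x, hx, hxx⟩
          cases hfind : entityConfig.items.find? (fun p => p.1 == tv.1) with
          | none => exact absurd hxx (List.find?_eq_none.mp hfind x hx)
          | some y => exact ⟨y.2, by simp [PySem.Dict.get?, hfind]⟩
        rcases hget with ⟨cfg, hcf⟩
        have hgetD : PySem.Dict.getD entityConfig tv.1 ("", "") = cfg := by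
          simp [PySem.Dict.getD, hcf]
        by_cases he : tv.2.isEmpty
        · have : tv.2 = [] := by simpa [List.isEmpty_iff] using he
          simp only [hc, Bool.not_true, Bool.false_or, he, if_true]
          rw [hnot]
          simp [pvApats, List.flatMap_cons, hcf, this, pvMarks]
        · simp only [hc, Bool.not_true, Bool.false_or, he, Bool.false_eq_true, if_false]
          rw [PySem.List.foldl_append_eq_flatMap, hnot]
          have hfil : tv.2.filter (fun v => !(v == "")) = tv.2 := by
            apply List.filter_eq_self.mpr
            intro v hv
            have : v ≠ "" := by
              intro hv0; subst hv0
              exact hno tv (List.mem_cons_self ..) hc hv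
            simpa using this
          simp only [pvApats, List.flatMap_cons, hcf, hfil, pvMarks, List.flatMap_append,
            List.flatMap_map, hgetD, List.append_assoc]
      · have hcf : PySem.Dict.get? entityConfig tv.1 = none := by
          simp only [PySem.Dict.contains] at hc
          have hc2 : (entityConfig.items.any (fun p => p.1 == tv.1)) = false :=
            Bool.eq_false_iff.mpr hc
          have hfn : entityConfig.items.find? (fun p => p.1 == tv.1) = none :=
            List.find?_eq_none.mpr (List.any_eq_false.mp hc2)
          simp [PySem.Dict.get?, hfn]
        simp only [hc, Bool.not_false, Bool.true_or, if_true]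
        rw [hnot]
        simp [pvApats, List.flatMap_cons, hcf, pvMarks]

lemma pvApats_nonempty (entidades : List (String × List String)) :
    ∀ q ∈ pvApats entidades, q.2.1 ≠ [] := by
  intro q hq
  unfold pvApats at hq
  rcases List.mem_flatMap.mp hq with ⟨tv, _, hm⟩
  cases hcf : PySem.Dict.get? entityConfig tv.1 with
  | none => rw [hcf] at hm; simp at hm
  | some cfg =>
      rw [hcf] at hm
      rcases List.mem_map.mp hm with ⟨v, hv, hq'⟩
      have := List.of_mem_filter hv
      have hne : v ≠ "" := by simpa using this
      rw [← hq']
      simp only [ne_eq]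
      intro h
      exact hne (String.toList_eq_nil_iff.mp h)

lemma pvApats_cfg (entidades : List (String × List String)) :
    ∀ q ∈ pvApats entidades,
      PySem.Dict.get? entityConfig q.1 = some (q.2.2.2, q.2.2.1) ∧
      q.1 ∈ entidades.map Prod.fst := by
  intro q hq
  unfold pvApats at hq
  rcases List.mem_flatMap.mp hq with ⟨tv, htv, hm⟩
  cases hcf : PySem.Dict.get? entityConfig tv.1 with
  | none => rw [hcf] at hm; simp at hm
  | some cfg =>
      rw [hcf] at hm
      rcases List.mem_map.mp hm with ⟨v, _, hq'⟩
      constructor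
      · rw [← hq']
        simpa using hcf
      · rw [← hq']
        exact List.mem_map.mpr ⟨tv, htv, rfl⟩

lemma pvApats_pairwise_K (entidades : List (String × List String))
    (hnd : (entidades.map Prod.fst).Nodup) :
    (pvApats entidades).Pairwise (fun q r =>
      (entidades.map Prod.fst).idxOf q.1 ≤ (entidades.map Prod.fst).idxOf r.1) := by
  have hfm : ∀ {α β : Type} (l : List α) (f : α → List β), l.flatMap f = (l.map f).flatten := by
    intro α β l f; induction l with
    | nil => simp
    | cons a t ih => simp [List.flatMap_cons, ih]
  unfold pvApats
  rw [hfm]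
  apply List.pairwise_flatten.mpr
  refine ⟨?_, ?_⟩
  · intro l hl
    rcases List.mem_map.mp hl with ⟨tv, htv, rfl⟩
    have hall : ∀ x ∈ (match PySem.Dict.get? entityConfig tv.1 with
        | some cfg => (tv.2.filter (fun v => !(v == ""))).map
            (fun (v : String) => (tv.1, v.toList, cfg.2, cfg.1))
        | none => ([] : List (String × List Char × String × String))), x.1 = tv.1 := by
      intro x hx
      cases hcf : PySem.Dict.get? entityConfig tv.1 with
      | none => rw [hcf] at hx; simp at hx
      | some cfg =>
          rw [hcf] at hx
          rcases List.mem_map.mp hx with ⟨v, _, rfl⟩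
          rfl
    apply List.pairwise_iff_getElem.mpr
    intro a b ha hb _
    rw [hall _ (List.getElem_mem ha), hall _ (List.getElem_mem hb)]
  · apply List.pairwise_map.mpr
    apply List.pairwise_iff_getElem.mpr
    intro a b ha hb hab x hx y hy
    have hxf : x.1 = entidades[a].1 := by
      cases hcf : PySem.Dict.get? entityConfig entidades[a].1 with
      | none => rw [hcf] at hx; simp at hx
      | some cfg =>
          rw [hcf] at hx
          rcases List.mem_map.mp hx with ⟨v, _, rfl⟩
          rfl
    have hyf : y.1 = entidades[b].1 := by
      cases hcf : PySem.Dict.get? entityConfig entidades[b].1 with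
      | none => rw [hcf] at hy; simp at hy
      | some cfg =>
          rw [hcf] at hy
          rcases List.mem_map.mp hy with ⟨v, _, rfl⟩
          rfl
    have ka : (entidades.map Prod.fst).idxOf entidades[a].1 = a := by
      have h1 : (entidades.map Prod.fst)[a]'(by simpa using ha) = entidades[a].1 := by
        simp [List.getElem_map]
      rw [← h1]
      exact hnd.idxOf_getElem a (by simpa using ha)
    have kb : (entidades.map Prod.fst).idxOf entidades[b].1 = b := by
      have h1 : (entidades.map Prod.fst)[b]'(by simpa using hb) = entidades[b].1 := by
        simp [List.getElem_map]
      rw [← h1]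
      exact hnd.idxOf_getElem b (by simpa using hb)
    rw [hxf, hyf, ka, kb]
    omega

lemma pvMarks_pairwise_K (text : List Char) (entidades : List (String × List String))
    (hnd : (entidades.map Prod.fst).Nodup) :
    (pvMarks text (pvApats entidades)).Pairwise (fun a b =>
      (entidades.map Prod.fst).idxOf a.2.2.1 ≤ (entidades.map Prod.fst).idxOf b.2.2.1) := by
  have hfm : ∀ {α β : Type} (l : List α) (f : α → List β), l.flatMap f = (l.map f).flatten := by
    intro α β l f; induction l with
    | nil => simp
    | cons a t ih => simp [List.flatMap_cons, ih]
  have htipo : ∀ (v : List Char) (tipo cor : String) m, m ∈ occsA text v tipo cor 0 → m.2.2.1 = tipo := by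
    intro v tipo cor m hm
    rcases (occsA_mem text v tipo cor 0 le_rfl m).mp hm with ⟨j, _, _, _, rfl⟩
    rfl
  unfold pvMarks
  rw [hfm]
  apply List.pairwise_flatten.mpr
  refine ⟨?_, ?_⟩
  · intro l hl
    rcases List.mem_map.mp hl with ⟨q, _, rfl⟩
    apply List.pairwise_iff_getElem.mpr
    intro a b ha hb _
    rw [htipo _ _ _ _ (List.getElem_mem ha), htipo _ _ _ _ (List.getElem_mem hb)]
  · apply List.pairwise_map.mpr
    apply (pvApats_pairwise_K entidades hnd).imp_of_mem ?_
    intro q r _ _ hqr x hx y hy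
    rw [htipo _ _ _ _ hx, htipo _ _ _ _ hy]
    exact hqr

-- ---------- A's greedy overlap filter ----------
lemma pvFoldl_filtradas (l : List (Int × Int × String × List Char × String)) :
    ∀ (acc : List (Int × Int × String × List Char × String)) (u : Int),
      (l.foldl (fun st m => if m.1 ≥ st.2 then (st.1 ++ [m], m.2.1) else st) (acc, u)).1
        = acc ++ pvGreedy l u := by
  induction l with
  | nil => intro acc u; simp [pvGreedy]
  | cons m t ih =>
      intro acc u
      simp only [List.foldl_cons, pvGreedy]
      by_cases h : m.1 ≥ u
      · simp only [h, if_true, if_pos h]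
        rw [ih]
        simp
      · simp only [h, if_false, if_neg h]
        exact ih acc u

-- ---------- best-match spec ----------
lemma pvBestA_none_iff (text : List Char) (pats : List (String × List Char × String × String))
    (i : Nat) :
    pvBestA text pats i = none ↔ ∀ q ∈ pats, ¬ (q.2.1 <+: text.drop i) := by
  have hsome : ∀ (t : List (String × List Char × String × String)) (b),
      t.foldl (pvStepA text i) (some b) ≠ none := by
    intro t
    induction t with
    | nil => intro b h; simp at h
    | cons r t ih =>
        intro b
        simp only [List.foldl_cons]
        rw [show pvStepA text i (some b) r =
          (if decide (r.2.1.length > b.2.1.length) && PySem.Chars.startswith (text.drop i) r.2.1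
           then some r else some b) from rfl]
        split_ifs with hc
        · exact ih r
        · exact ih b
  unfold pvBestA
  induction pats with
  | nil => simp
  | cons r t ih =>
      simp only [List.foldl_cons, List.mem_cons]
      rw [show pvStepA text i none r =
        (if PySem.Chars.startswith (text.drop i) r.2.1 then some r else none) from rfl]
      by_cases hs : PySem.Chars.startswith (text.drop i) r.2.1 = true
      · rw [if_pos hs]
        constructor
        · intro h; exact absurd h (hsome t r)
        · intro h
          exact absurd ((PySem.Chars.startswith_iff _ _).mp hs) (h r (Or.inl rfl))
      · rw [if_neg hs]
        constructor
        · intro h q hq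
          rcases hq with rfl | hq
          · intro hpre; exact hs ((PySem.Chars.startswith_iff _ _).mpr hpre)
          · exact (ih.mp h) q hq
        · intro h
          exact ih.mpr (fun q hq => h q (Or.inr hq))

lemma pvBestA_cases (text : List Char) (pats : List (String × List Char × String × String))
    (i : Nat) :
    pvBestA text pats i = none ∨
    ∃ l1 q l2, pvBestA text pats i = some q ∧ pats = l1 ++ q :: l2 ∧ q.2.1 <+: text.drop i ∧
      (∀ r ∈ l1, r.2.1 <+: text.drop i → r.2.1.length < q.2.1.length) ∧
      (∀ r ∈ l2, r.2.1 <+: text.drop i → r.2.1.length ≤ q.2.1.length) := by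
  induction pats using List.reverseRecOn with
  | nil => left; rfl
  | append_singleton l r ih =>
      have hfold : pvBestA text (l ++ [r]) i = pvStepA text i (pvBestA text l i) r := by
        unfold pvBestA; rw [List.foldl_append]; rfl
      rcases ih with hnone | ⟨l1, q, l2, hq, hdec, hpre, hl1, hl2⟩
      · rw [hnone] at hfold
        rw [show pvStepA text i none r =
          (if PySem.Chars.startswith (text.drop i) r.2.1 then some r else none) from rfl] at hfold
        by_cases hs : PySem.Chars.startswith (text.drop i) r.2.1 = true
        · right
          rw [if_pos hs] at hfold
          refine ⟨l, r, [], hfold, rfl, (PySem.Chars.startswith_iff _ _).mp hs, ?_, by simp⟩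
          intro r' hr' hpre'
          exact absurd hpre' ((pvBestA_none_iff text l i).mp hnone r' hr')
        · left
          rw [if_neg hs] at hfold
          exact hfold
      · rw [hq] at hfold
        rw [show pvStepA text i (some q) r =
          (if decide (r.2.1.length > q.2.1.length) && PySem.Chars.startswith (text.drop i) r.2.1
           then some r else some q) from rfl] at hfold
        by_cases hc : (decide (r.2.1.length > q.2.1.length) &&
            PySem.Chars.startswith (text.drop i) r.2.1) = true
        · right
          rw [if_pos hc] at hfold
          have hc2 := hc
          simp only [Bool.and_eq_true, decide_eq_true_eq] at hc2
          obtain ⟨hlen', hs⟩ := hc2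
          refine ⟨l, r, [], hfold, by rw [hdec], (PySem.Chars.startswith_iff _ _).mp hs, ?_, by simp⟩
          intro r' hr' hpre'
          rw [hdec] at hr'
          rcases List.mem_append.mp hr' with h1 | h1
          · exact lt_trans (hl1 r' h1 hpre') hlen'
          · rcases List.mem_cons.mp h1 with rfl | h1
            · exact hlen'
            · exact lt_of_le_of_lt (hl2 r' h1 hpre') hlen'
        · right
          rw [if_neg hc] at hfold
          refine ⟨l1, q, l2 ++ [r], hfold, by rw [hdec]; simp, hpre, hl1, ?_⟩
          intro r' hr' hpre'
          rcases List.mem_append.mp hr' with h1 | h1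
          · exact hl2 r' h1 hpre'
          · rcases List.mem_cons.mp h1 with rfl | h1
            · by_contra hgt
              apply hc
              simp only [Bool.and_eq_true, decide_eq_true_eq]
              exact ⟨by omega, (PySem.Chars.startswith_iff _ _).mpr hpre'⟩
            · simp at h1

lemma pvBestA_spec (text : List Char) (pats : List (String × List Char × String × String))
    (i : Nat) (q : String × List Char × String × String) (h : pvBestA text pats i = some q) :
    q.2.1 <+: text.drop i ∧
    (∀ r ∈ pats, r.2.1 <+: text.drop i → r.2.1.length ≤ q.2.1.length) ∧
    (∃ l1 l2, pats = l1 ++ q :: l2 ∧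
      ∀ r ∈ l1, r.2.1 <+: text.drop i → r.2.1.length < q.2.1.length) := by
  rcases pvBestA_cases text pats i with hnone | ⟨l1, q', l2, hq', hdec, hpre, hl1, hl2⟩
  · rw [h] at hnone; simp at hnone
  · rw [h] at hq'
    have hqq : q' = q := (Option.some_inj.mp hq').symm
    subst hqq
    refine ⟨hpre, ?_, l1, l2, hdec, hl1⟩
    intro r hr hpre'
    rw [hdec] at hr
    rcases List.mem_append.mp hr with h1 | h1
    · exact le_of_lt (hl1 r h1 hpre')
    · rcases List.mem_cons.mp h1 with rfl | h1
      · exact le_refl _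
      · exact hl2 r h1 hpre'

lemma bestMatch_forget (text : List Char) (pats : List (String × List Char × String × String))
    (i : Nat) :
    bestMatch text (pats.map pvForget) i = (pvBestA text pats i).map pvForget := by
  unfold bestMatch pvBestA
  rw [List.foldl_map]
  suffices H : ∀ (t : List (String × List Char × String × String))
      (acc : Option (String × List Char × String × String)),
      t.foldl (fun best q =>
        match best with
        | none => if PySem.Chars.startswith (text.drop i) (pvForget q).1 then some (pvForget q) else none
        | some b =>
            if decide ((pvForget q).1.length > b.1.length) &&
                PySem.Chars.startswith (text.drop i) (pvForget q).1
            then some (pvForget q) else some b) (acc.map pvForget)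
        = (t.foldl (pvStepA text i) acc).map pvForget by
    exact H pats none
  intro t
  induction t with
  | nil => intro acc; rfl
  | cons q t ih =>
      intro acc
      simp only [List.foldl_cons]
      have hstep : (match acc.map pvForget with
          | none => if PySem.Chars.startswith (text.drop i) (pvForget q).1 then some (pvForget q) else none
          | some b =>
              if decide ((pvForget q).1.length > b.1.length) &&
                  PySem.Chars.startswith (text.drop i) (pvForget q).1
              then some (pvForget q) else some b)
          = (pvStepA text i acc q).map pvForget := by
        cases acc with
        | none =>
            by_cases hs : PySem.Chars.startswith (text.drop i) q.2.1 = true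
            · simp [pvStepA, pvForget, hs]
            · simp [pvStepA, pvForget, hs]
        | some b =>
            by_cases hc : (decide (q.2.1.length > b.2.1.length) &&
                PySem.Chars.startswith (text.drop i) q.2.1) = true
            · simp only [pvStepA, pvForget, Option.map_some]
              rw [if_pos (by simpa [pvForget] using hc), if_pos hc]
              rfl
            · simp only [pvStepA, pvForget, Option.map_some]
              rw [if_neg (by simpa [pvForget] using hc), if_neg hc]
              rfl
      rw [hstep, ih]

-- ---------- selection facts ----------
lemma pvSelA_nil (text : List Char) (pats : List (String × List Char × String × String))
    (hp : ∀ q ∈ pats, q.2.1 ≠ []) (u : Nat)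
    (h : ∀ m, pvValid text pats m → (u : Int) ≤ m.1 → False) :
    pvSelA text pats hp u = [] := by
  revert h
  suffices H : ∀ (fuel u : Nat), text.length - u ≤ fuel →
      (∀ m, pvValid text pats m → (u : Int) ≤ m.1 → False) → pvSelA text pats hp u = [] by
    exact H text.length u (by omega)
  intro fuel
  induction fuel with
  | zero =>
      intro u hf hno
      exact pvSelA_stop_eq text pats hp u (by omega)
  | succ fuel ih =>
      intro u hf hno
      by_cases hu : u < text.length
      · cases hb : pvBestA text pats u with
        | none =>
            rw [pvSelA_none_eq text pats hp u hu hb]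
            exact ih (u+1) (by omega) (fun m hv hm => hno m hv (le_trans (by push_cast; omega) hm))
        | some q =>
            exfalso
            have hq := pvBestA_mem hb
            have hpre := (pvBestA_spec text pats u q hb).1
            exact hno (pvMarkOf (u, q)) ⟨q, hq, u, by omega, hpre, rfl⟩ (by simp [pvMarkOf])
      · exact pvSelA_stop_eq text pats hp u hu

lemma pvSelA_congr (text : List Char) (pats : List (String × List Char × String × String))
    (hp : ∀ q ∈ pats, q.2.1 ≠ []) :
    ∀ (v u : Nat), u ≤ v → (∀ j : Nat, u ≤ j → j < v → pvBestA text pats j = none) →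
    pvSelA text pats hp u = pvSelA text pats hp v := by
  suffices H : ∀ (fuel v u : Nat), v - u ≤ fuel → u ≤ v →
      (∀ j : Nat, u ≤ j → j < v → pvBestA text pats j = none) →
      pvSelA text pats hp u = pvSelA text pats hp v by
    intro v u h1 h2
    exact H (v - u) v u (by omega) h1 h2
  intro fuel
  induction fuel with
  | zero =>
      intro v u hf hle _
      have huv : u = v := by omega
      rw [huv]
  | succ fuel ih =>
      intro v u hf hle hnone
      by_cases huv : u = v
      · rw [huv]
      · have hlt : u < v := by omega
        have hbu := hnone u le_rfl hlt
        by_cases hu : u < text.length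
        · rw [pvSelA_none_eq text pats hp u hu hbu]
          exact ih v (u+1) (by omega) (by omega) (fun j hj1 hj2 => hnone j (by omega) hj2)
        · rw [pvSelA_stop_eq text pats hp u hu, pvSelA_stop_eq text pats hp v (by omega)]

-- ---------- the key lemma: greedy over the stable sort = left-to-right longest-match scan ----------
lemma pvGreedy_main (text : List Char) (pats : List (String × List Char × String × String))
    (K : String → Nat)
    (hp : ∀ q ∈ pats, q.2.1 ≠ [])
    (hKpair : pats.Pairwise (fun q r => K q.1 ≤ K r.1))
    (hKinj : ∀ q ∈ pats, ∀ r ∈ pats, K q.1 = K r.1 → q.1 = r.1)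
    (hcfg : ∀ q ∈ pats, ∀ r ∈ pats, q.1 = r.1 → q.2.2 = r.2.2) :
    ∀ (l : List (Int × Int × String × List Char × String)),
      l.Pairwise (pvSRel (fun m => m.1) (fun m => -(m.2.1 - m.1)) (fun a b => K a.2.2.1 ≤ K b.2.2.1)) →
      (∀ m ∈ l, pvValid text pats m) →
      ∀ (u : Nat), (∀ m, pvValid text pats m → (u : Int) ≤ m.1 → m ∈ l) →
      pvGreedy l u = (pvSelA text pats hp u).map pvMarkOf := by
  intro l
  induction l with
  | nil =>
      intro _ _ u hcomp
      rw [pvSelA_nil text pats hp u (fun m hv hm => by simpa using hcomp m hv hm)]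
      rfl
  | cons m t ih =>
      intro hpair hvalid u hcomp
      rcases List.pairwise_cons.mp hpair with ⟨hm_rel, hpt⟩
      rcases hvalid m (List.mem_cons_self ..) with ⟨q0, hq0, i0, hi0n, hpre0, hmeq⟩
      have hm1 : m.1 = (i0 : Int) := by rw [hmeq]; rfl
      have hm2 : m.2.1 = (i0 : Int) + q0.2.1.length := by rw [hmeq]; rfl
      have hm3 : m.2.2.1 = q0.1 := by rw [hmeq]; rfl
      by_cases hstart : m.1 ≥ (u : Int)
      · have hui0 : u ≤ i0 := by omega
        have hL0 : 0 < q0.2.1.length := List.length_pos_iff.mpr (hp q0 hq0)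
        have hi0lt : i0 < text.length := by
          by_contra hge
          have hnil : text.drop i0 = [] := List.drop_eq_nil_of_le (by omega)
          rw [hnil] at hpre0
          exact hp q0 hq0 (List.prefix_nil.mp hpre0)
        have hnone : ∀ j : Nat, u ≤ j → j < i0 → pvBestA text pats j = none := by
          intro j hj1 hj2
          cases hbj : pvBestA text pats j with
          | none => rfl
          | some r =>
              exfalso
              have hrmem := pvBestA_mem hbj
              have hrpre := (pvBestA_spec text pats j r hbj).1
              have hvr : pvValid text pats (pvMarkOf (j, r)) :=
                ⟨r, hrmem, j, by omega, hrpre, rfl⟩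
              have hin := hcomp _ hvr (by simp only [pvMarkOf]; push_cast; omega)
              rcases List.mem_cons.mp hin with heq | hin
              · have h1 := congrArg (fun x => x.1) heq
                simp only [pvMarkOf] at h1
                rw [hm1] at h1
                have : j = i0 := by exact_mod_cast h1
                omega
              · have h1 := (hm_rel _ hin).1
                rw [pvSLt_false_iff] at h1
                simp only [pvMarkOf] at h1
                rw [hm1] at h1
                have hji : (j : Int) < (i0 : Int) := by exact_mod_cast hj2
                omega
        have hselu : pvSelA text pats hp u = pvSelA text pats hp i0 :=
          pvSelA_congr text pats hp i0 u hui0 hnone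
        cases hbi : pvBestA text pats i0 with
        | none =>
            exfalso
            exact ((pvBestA_none_iff text pats i0).mp hbi) q0 hq0 hpre0
        | some bq =>
            have hbmem := pvBestA_mem hbi
            rcases pvBestA_spec text pats i0 bq hbi with ⟨hbpre, hbmax, l1, l2, hdec, hl1⟩
            have hmeqb : m = pvMarkOf (i0, bq) := by
              by_contra hne
              have hvb : pvValid text pats (pvMarkOf (i0, bq)) :=
                ⟨bq, hbmem, i0, by omega, hbpre, rfl⟩
              have hin := hcomp _ hvb (by simp only [pvMarkOf]; push_cast; omega)
              rcases List.mem_cons.mp hin with heq | hin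
              · exact hne heq.symm
              · have hrel := hm_rel _ hin
                have hlen1 : bq.2.1.length ≤ q0.2.1.length := by
                  have h1 := hrel.1
                  rw [pvSLt_false_iff] at h1
                  simp only [pvMarkOf] at h1
                  rw [hm1, hm2] at h1
                  omega
                have hlen2 : q0.2.1.length ≤ bq.2.1.length := hbmax q0 hq0 hpre0
                have hleneq : q0.2.1.length = bq.2.1.length := le_antisymm hlen2 hlen1
                have hval : q0.2.1 = bq.2.1 := by
                  rw [List.prefix_iff_eq_take.mp hpre0, List.prefix_iff_eq_take.mp hbpre, hleneq]
                have hKle : K q0.1 ≤ K bq.1 := by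
                  have h2 := hrel.2 (by
                    constructor
                    · simp only [pvMarkOf]; rw [hm1]
                    · simp only [pvMarkOf]; rw [hm1, hm2]; push_cast; rw [hleneq])
                  simpa [pvMarkOf, hm3] using h2
                have hq0pos : q0 ∈ l1 ∨ q0 = bq ∨ q0 ∈ l2 := by
                  rw [hdec] at hq0
                  simpa [List.mem_append, List.mem_cons] using hq0
                rcases hq0pos with h1 | h2 | h3
                · have := hl1 q0 h1 hpre0
                  omega
                · exact hne (by rw [hmeq, h2])
                · have hKge : K bq.1 ≤ K q0.1 := by
                    have hpw := hKpair
                    rw [hdec] at hpw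
                    have hpw2 := (List.pairwise_append.mp hpw).2.1
                    exact (List.pairwise_cons.mp hpw2).1 q0 h3
                  have htipo : bq.1 = q0.1 := hKinj bq hbmem q0 hq0 (le_antisymm hKge hKle)
                  have hcl : bq.2.2 = q0.2.2 := hcfg bq hbmem q0 hq0 htipo
                  have hq0bq : q0 = bq := by
                    rcases q0 with ⟨t0, v0, c0⟩
                    rcases bq with ⟨t1, v1, c1⟩
                    simp only at htipo hval hcl
                    simp [htipo, hval, hcl]
                  exact hne (by rw [hmeq, hq0bq])
            have hLbq : 0 < bq.2.1.length := List.length_pos_iff.mpr (hp bq hbmem)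
            have hsel_i0 : pvSelA text pats hp i0 =
                (i0, bq) :: pvSelA text pats hp (i0 + bq.2.1.length) :=
              pvSelA_cons_eq text pats hp i0 bq hi0lt hbi
            have hgreedy : pvGreedy (m :: t) (u : Int) = m :: pvGreedy t m.2.1 := by
              simp [pvGreedy, hstart]
            rw [hgreedy, hselu, hsel_i0, List.map_cons, ← hmeqb]
            congr 1
            have hlenq : q0.2.1.length = bq.2.1.length := by
              have := congrArg (fun x => x.2.1) hmeqb
              simp only [pvMarkOf] at this
              rw [hm2] at this
              omega
            have hm21 : m.2.1 = ((i0 + bq.2.1.length : Nat) : Int) := by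
              rw [hm2, hlenq]; push_cast; ring
            rw [hm21]
            apply ih hpt (fun x hx => hvalid x (List.mem_cons_of_mem _ hx)) (i0 + bq.2.1.length)
            intro x hvx hxge
            have hin := hcomp x hvx (by push_cast at hxge ⊢; omega)
            rcases List.mem_cons.mp hin with heq | hin
            · exfalso
              rw [heq, hm1] at hxge
              push_cast at hxge
              omega
            · exact hin
      · have hgreedy : pvGreedy (m :: t) (u : Int) = pvGreedy t (u : Int) := by
          simp [pvGreedy, hstart]
        rw [hgreedy]
        apply ih hpt (fun x hx => hvalid x (List.mem_cons_of_mem _ hx)) u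
        intro x hvx hxge
        have hin := hcomp x hvx hxge
        rcases List.mem_cons.mp hin with heq | hin
        · exact absurd (heq ▸ hxge) hstart
        · exact hin

-- ---------- rendering ----------
lemma pvEscape_nil : escapeHtml [] = [] := by decide

lemma pvJoin_flatten (L : List (List Char)) : PySem.Chars.join [] L = L.flatten := by
  induction L with
  | nil => simpa using PySem.Chars.join_nil []
  | cons a t ih =>
      cases t with
      | nil => simp [PySem.Chars.join_singleton]
      | cons b t2 =>
          rw [PySem.Chars.join_cons_cons]
          simp only [List.flatten_cons]
          rw [ih]
          simp

lemma pvRenderA (text : List Char) (pats : List (String × List Char × String × String))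
    (hp : ∀ q ∈ pats, q.2.1 ≠ [])
    (hlab : ∀ q ∈ pats, (PySem.Dict.getD entityConfig q.1 ("", "")).1 = q.2.2.2) :
    ∀ (v u : Nat) (acc : List (List Char)),
      (if (((pvSelA text pats hp v).map pvMarkOf).foldl
            (fun (st : List (List Char) × Int) m =>
              ((if m.1 > st.2 then
                  st.1 ++ [escapeHtml (PySem.List.slice text (some st.2) (some m.1))] else st.1) ++
                [spanHtml m.2.2.2.2 (PySem.Dict.getD entityConfig m.2.2.1 ("", "")).1 m.2.2.2.1],
               m.2.1)) (acc, (u : Int))).2 < (text.length : Int) then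
          (((pvSelA text pats hp v).map pvMarkOf).foldl
            (fun (st : List (List Char) × Int) m =>
              ((if m.1 > st.2 then
                  st.1 ++ [escapeHtml (PySem.List.slice text (some st.2) (some m.1))] else st.1) ++
                [spanHtml m.2.2.2.2 (PySem.Dict.getD entityConfig m.2.2.1 ("", "")).1 m.2.2.2.1],
               m.2.1)) (acc, (u : Int))).1 ++
            [escapeHtml (PySem.List.slice text
              (some ((((pvSelA text pats hp v).map pvMarkOf).foldl
                (fun (st : List (List Char) × Int) m =>
                  ((if m.1 > st.2 then
                      st.1 ++ [escapeHtml (PySem.List.slice text (some st.2) (some m.1))] else st.1) ++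
                    [spanHtml m.2.2.2.2 (PySem.Dict.getD entityConfig m.2.2.1 ("", "")).1 m.2.2.2.1],
                   m.2.1)) (acc, (u : Int))).2)) none)]
        else
          (((pvSelA text pats hp v).map pvMarkOf).foldl
            (fun (st : List (List Char) × Int) m =>
              ((if m.1 > st.2 then
                  st.1 ++ [escapeHtml (PySem.List.slice text (some st.2) (some m.1))] else st.1) ++
                [spanHtml m.2.2.2.2 (PySem.Dict.getD entityConfig m.2.2.1 ("", "")).1 m.2.2.2.1],
               m.2.1)) (acc, (u : Int))).1).flatten
      = acc.flatten ++ pvChunks text u (pvSelA text pats hp v) := by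
  suffices H : ∀ (fuel v u : Nat) (acc : List (List Char)), text.length - v ≤ fuel →
      (if (((pvSelA text pats hp v).map pvMarkOf).foldl
            (fun (st : List (List Char) × Int) m =>
              ((if m.1 > st.2 then
                  st.1 ++ [escapeHtml (PySem.List.slice text (some st.2) (some m.1))] else st.1) ++
                [spanHtml m.2.2.2.2 (PySem.Dict.getD entityConfig m.2.2.1 ("", "")).1 m.2.2.2.1],
               m.2.1)) (acc, (u : Int))).2 < (text.length : Int) then
          (((pvSelA text pats hp v).map pvMarkOf).foldl
            (fun (st : List (List Char) × Int) m =>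
              ((if m.1 > st.2 then
                  st.1 ++ [escapeHtml (PySem.List.slice text (some st.2) (some m.1))] else st.1) ++
                [spanHtml m.2.2.2.2 (PySem.Dict.getD entityConfig m.2.2.1 ("", "")).1 m.2.2.2.1],
               m.2.1)) (acc, (u : Int))).1 ++
            [escapeHtml (PySem.List.slice text
              (some ((((pvSelA text pats hp v).map pvMarkOf).foldl
                (fun (st : List (List Char) × Int) m =>
                  ((if m.1 > st.2 then
                      st.1 ++ [escapeHtml (PySem.List.slice text (some st.2) (some m.1))] else st.1) ++
                    [spanHtml m.2.2.2.2 (PySem.Dict.getD entityConfig m.2.2.1 ("", "")).1 m.2.2.2.1],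
                   m.2.1)) (acc, (u : Int))).2)) none)]
        else
          (((pvSelA text pats hp v).map pvMarkOf).foldl
            (fun (st : List (List Char) × Int) m =>
              ((if m.1 > st.2 then
                  st.1 ++ [escapeHtml (PySem.List.slice text (some st.2) (some m.1))] else st.1) ++
                [spanHtml m.2.2.2.2 (PySem.Dict.getD entityConfig m.2.2.1 ("", "")).1 m.2.2.2.1],
               m.2.1)) (acc, (u : Int))).1).flatten
      = acc.flatten ++ pvChunks text u (pvSelA text pats hp v) by
    intro v u acc
    exact H text.length v u acc (by omega)
  intro fuel
  induction fuel with
  | zero =>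
      intro v u acc hf
      rw [pvSelA_stop_eq text pats hp v (by omega)]
      simp only [List.map_nil, List.foldl_nil, pvChunks]
      by_cases hu : (u : Int) < (text.length : Int)
      · rw [if_pos hu]
        rw [show PySem.List.slice text (some (u : Int)) none = text.drop u from
          PySem.List.slice_from_natCast text u]
        simp [List.flatten_append]
      · rw [if_neg hu]
        have hdn : text.drop u = [] := List.drop_eq_nil_of_le (by
          have : ¬ (u : Int) < (text.length : Int) := hu
          omega)
        rw [hdn, pvEscape_nil]
        simp
  | succ fuel ih =>
      intro v u acc hf
      by_cases hv : v < text.length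
      · cases hb : pvBestA text pats v with
        | none =>
            rw [pvSelA_none_eq text pats hp v hv hb]
            exact ih (v+1) u acc (by omega)
        | some q =>
            have hq := pvBestA_mem hb
            have hL : 0 < q.2.1.length := List.length_pos_iff.mpr (hp q hq)
            rw [pvSelA_cons_eq text pats hp v q hv hb]
            simp only [List.map_cons, List.foldl_cons, pvChunks]
            have hstep : ((if (pvMarkOf (v, q)).1 > ((u : Int)) then
                  acc ++ [escapeHtml (PySem.List.slice text (some (u : Int)) (some (pvMarkOf (v, q)).1))]
                else acc) ++
                [spanHtml (pvMarkOf (v, q)).2.2.2.2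
                  (PySem.Dict.getD entityConfig (pvMarkOf (v, q)).2.2.1 ("", "")).1
                  (pvMarkOf (v, q)).2.2.2.1],
                (pvMarkOf (v, q)).2.1)
                = ((if (v : Int) > (u : Int) then
                      acc ++ [escapeHtml ((text.drop u).take (v - u))] else acc) ++
                    [spanHtml q.2.2.1 q.2.2.2 q.2.1],
                   (((v + q.2.1.length : Nat)) : Int)) := by
              simp only [pvMarkOf]
              rw [hlab q hq]
              rw [show PySem.List.slice text (some (u : Int)) (some ((v : Nat) : Int))
                = (text.drop u).take (v - u) from PySem.List.slice_natCast text u v]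
              rw [show ((v : Int) + (q.2.1.length : Int)) = (((v + q.2.1.length : Nat)) : Int) from
                by push_cast; ring]
            rw [hstep]
            rw [ih (v + q.2.1.length) (v + q.2.1.length) _ (by omega)]
            by_cases hvu : (v : Int) > (u : Int)
            · rw [if_pos hvu]
              simp [List.flatten_append, List.append_assoc]
            · rw [if_neg hvu]
              have hv_u : v - u = 0 := by omega
              rw [hv_u]
              simp [pvEscape_nil, List.flatten_append, List.append_assoc]
      · rw [pvSelA_stop_eq text pats hp v hv]
        simp only [List.map_nil, List.foldl_nil, pvChunks]
        by_cases hu : (u : Int) < (text.length : Int)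
        · rw [if_pos hu]
          rw [show PySem.List.slice text (some (u : Int)) none = text.drop u from
            PySem.List.slice_from_natCast text u]
          simp [List.flatten_append]
        · rw [if_neg hu]
          have hdn : text.drop u = [] := List.drop_eq_nil_of_le (by
            have : ¬ (u : Int) < (text.length : Int) := hu
            omega)
          rw [hdn, pvEscape_nil]
          simp

lemma bScan_stop (text : List Char) (l : List (List Char × String × String))
    (hp' : ∀ p ∈ l, p.1 ≠ []) (i plain : Nat) (out : List (List Char))
    (h : ¬ i < text.length) :
    bScan text l hp' i plain out
      = out ++ [escapeHtml (PySem.List.slice text (some (plain : Int)) none)] := by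
  rw [bScan.eq_def, dif_neg h]

lemma bScan_none (text : List Char) (l : List (List Char × String × String))
    (hp' : ∀ p ∈ l, p.1 ≠ []) (i plain : Nat) (out : List (List Char))
    (h : i < text.length) (hb : bestMatch text l i = none) :
    bScan text l hp' i plain out = bScan text l hp' (i + 1) plain out := by
  rw [bScan.eq_def, dif_pos h]
  split
  · rfl
  · rename_i p hp2
    rw [hb] at hp2
    simp at hp2

lemma bScan_some (text : List Char) (l : List (List Char × String × String))
    (hp' : ∀ p ∈ l, p.1 ≠ []) (i plain : Nat) (out : List (List Char))
    (p : List Char × String × String)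
    (h : i < text.length) (hb : bestMatch text l i = some p) :
    bScan text l hp' i plain out = bScan text l hp' (i + p.1.length) (i + p.1.length)
      (out ++ [escapeHtml (PySem.List.slice text (some (plain : Int)) (some (i : Int))),
               spanHtml p.2.1 p.2.2 p.1]) := by
  rw [bScan.eq_def, dif_pos h]
  split
  · rename_i hp2
    rw [hb] at hp2
    simp at hp2
  · rename_i p' hp2
    rw [hb] at hp2
    rw [← Option.some_inj.mp hp2]

lemma pvRenderB (text : List Char) (pats : List (String × List Char × String × String))
    (hp : ∀ q ∈ pats, q.2.1 ≠ []) (hp' : ∀ p ∈ pats.map pvForget, p.1 ≠ []) :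
    ∀ (i plain : Nat) (out : List (List Char)),
      (bScan text (pats.map pvForget) hp' i plain out).flatten
      = out.flatten ++ pvChunks text plain (pvSelA text pats hp i) := by
  suffices H : ∀ (fuel i plain : Nat) (out : List (List Char)), text.length - i ≤ fuel →
      (bScan text (pats.map pvForget) hp' i plain out).flatten
      = out.flatten ++ pvChunks text plain (pvSelA text pats hp i) by
    intro i plain out
    exact H text.length i plain out (by omega)
  intro fuel
  induction fuel with
  | zero =>
      intro i plain out hf
      have hi : ¬ i < text.length := by omega
      rw [bScan_stop text _ hp' i plain out hi, pvSelA_stop_eq text pats hp i hi]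
      simp only [pvChunks]
      rw [show PySem.List.slice text (some (plain : Int)) none = text.drop plain from
        PySem.List.slice_from_natCast text plain]
      simp [List.flatten_append]
  | succ fuel ih =>
      intro i plain out hf
      by_cases hi : i < text.length
      · cases hb : pvBestA text pats i with
        | none =>
            have hbm : bestMatch text (pats.map pvForget) i = none := by
              rw [bestMatch_forget, hb]; rfl
            rw [bScan_none text _ hp' i plain out hi hbm,
              pvSelA_none_eq text pats hp i hi hb]
            exact ih (i+1) plain out (by omega)
        | some q =>
            have hq := pvBestA_mem hb
            have hL : 0 < q.2.1.length := List.length_pos_iff.mpr (hp q hq)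
            have hbm : bestMatch text (pats.map pvForget) i = some (pvForget q) := by
              rw [bestMatch_forget, hb]; rfl
            rw [bScan_some text _ hp' i plain out (pvForget q) hi hbm,
              pvSelA_cons_eq text pats hp i q hi hb]
            have hlen : (pvForget q).1.length = q.2.1.length := rfl
            rw [hlen]
            rw [ih (i + q.2.1.length) (i + q.2.1.length) _ (by omega)]
            simp only [pvChunks, pvForget]
            rw [show PySem.List.slice text (some (plain : Int)) (some ((i : Nat) : Int))
              = (text.drop plain).take (i - plain) from PySem.List.slice_natCast text plain i]
            simp [List.flatten_append, List.append_assoc]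
      · rw [bScan_stop text _ hp' i plain out hi, pvSelA_stop_eq text pats hp i hi]
        simp only [pvChunks]
        rw [show PySem.List.slice text (some (plain : Int)) none = text.drop plain from
          PySem.List.slice_from_natCast text plain]
        simp [List.flatten_append]

-- ---------- tightness: A's output always ends with a zero-width span inside D_, B's never ----------
lemma go_not_mem (old new : List Char) (c0 : Char) (hnew : c0 ∉ new) (hone : old ≠ []) :
    ∀ (fuel : Nat) (l acc : List Char), l.length ≤ fuel → (old = [c0] ∨ c0 ∉ l) → c0 ∉ acc →
    c0 ∉ PySem.Chars.replace.go old new fuel l acc := by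
  intro fuel
  induction fuel with
  | zero =>
      intro l acc hlen hl hacc
      have : l = [] := by cases l with | nil => rfl | cons a b => simp at hlen
      subst this
      rw [PySem.Chars.replace.go]
      simpa using hacc
  | succ fuel ih =>
      intro l acc hlen hl hacc
      cases l with
      | nil =>
          rw [PySem.Chars.replace.go]
          · simpa using hacc
          · omega
      | cons c t =>
          rw [PySem.Chars.replace.go]
          by_cases hpre : old.isPrefixOf (c :: t) = true
          · rw [if_pos hpre]
            apply ih
            · have hol : 1 ≤ old.length := List.length_pos_iff.mpr hone
              simp only [List.length_drop, List.length_cons] at hlen ⊢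
              omega
            · rcases hl with rfl | hl
              · left; rfl
              · right; intro hm; exact hl (List.mem_of_mem_drop hm)
            · simp only [List.mem_append, List.mem_reverse]
              rintro (h | h)
              · exact hnew h
              · exact hacc h
          · rw [if_neg hpre]
            apply ih
            · simp at hlen ⊢; omega
            · rcases hl with rfl | hl
              · left; rfl
              · right; intro hm; exact hl (List.mem_cons_of_mem _ hm)
            · intro hm
              rcases List.mem_cons.mp hm with rfl | hm
              · rcases hl with he | hl
                · apply hpre; rw [he]; simp [List.isPrefixOf]
                · exact hl (List.mem_cons_self ..)
              · exact hacc hm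

lemma go_ne_nil (old new : List Char) (hnew : new ≠ []) :
    ∀ (fuel : Nat) (l acc : List Char), (l ≠ [] ∨ acc ≠ []) →
    PySem.Chars.replace.go old new fuel l acc ≠ [] := by
  intro fuel
  induction fuel with
  | zero =>
      intro l acc h
      rw [PySem.Chars.replace.go]
      rcases h with h | h <;> simp [h]
  | succ fuel ih =>
      intro l acc h
      cases l with
      | nil =>
          rw [PySem.Chars.replace.go]
          · rcases h with h | h
            · exact absurd rfl h
            · simpa using h
          · omega
      | cons c t =>
          rw [PySem.Chars.replace.go]
          by_cases hpre : old.isPrefixOf (c :: t) = true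
          · rw [if_pos hpre]
            apply ih
            right
            intro hh
            rcases List.append_eq_nil_iff.mp hh with ⟨h1, _⟩
            exact hnew (by simpa using h1)
          · rw [if_neg hpre]
            exact ih _ _ (Or.inr (by simp))

lemma replace_not_mem (s old new : List Char) (c0 : Char)
    (h1 : old = [c0] ∨ c0 ∉ s) (h2 : c0 ∉ new) (hne : old ≠ []) :
    c0 ∉ PySem.Chars.replace s old new := by
  rw [PySem.Chars.replace]
  rw [if_neg (by simpa [List.isEmpty_iff] using hne)]
  exact go_not_mem old new c0 h2 hne s.length s [] le_rfl h1 (by simp)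

lemma replace_ne_nil (s old new : List Char) (hs : s ≠ []) (hnew : new ≠ []) :
    PySem.Chars.replace s old new ≠ [] := by
  rw [PySem.Chars.replace]
  by_cases he : old.isEmpty = true
  · rw [if_pos he]; simp [hnew]
  · rw [if_neg he]
    exact go_ne_nil old new hnew s.length s [] (Or.inl hs)

lemma escapeHtml_gt_not_mem (l : List Char) : '>' ∉ escapeHtml l := by
  unfold escapeHtml
  apply replace_not_mem _ _ _ _ _ (by decide) (by decide)
  right
  apply replace_not_mem _ _ _ _ (Or.inl rfl) (by decide) (by decide)

lemma escapeHtml_ne_nil (l : List Char) (h : l ≠ []) : escapeHtml l ≠ [] := by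
  unfold escapeHtml
  apply replace_ne_nil _ _ _ _ (by decide)
  apply replace_ne_nil _ _ _ _ (by decide)
  apply replace_ne_nil _ _ _ _ (by decide)
  exact replace_ne_nil _ _ _ h (by decide)

-- the 8-character marker A's zero-width trailing span produces
def pvSigma : List Char := "></span>".toList

-- a list ending in nonempty C (without '>') followed by "</span>" does not end in pvSigma
lemma pvNoSigma_span (w C : List Char) (hC : C ≠ []) (hgt : '>' ∉ C) :
    ¬ pvSigma <:+ (w ++ C ++ "</span>".toList) := by
  rintro ⟨v, hv⟩
  have hσ : pvSigma = ['>'] ++ "</span>".toList := by decide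
  rw [hσ, ← List.append_assoc] at hv
  rw [List.append_assoc w C] at hv
  rw [show C ++ "</span>".toList = C ++ "</span>".toList from rfl] at hv
  have hv2 : (v ++ ['>']) ++ "</span>".toList = (w ++ C) ++ "</span>".toList := by
    rw [hv, List.append_assoc]
  have hv3 : v ++ ['>'] = w ++ C := by
    exact List.append_cancel_right hv2
  have hlast : (w ++ C).getLast? = some '>' := by
    rw [← hv3]
    simp
  rw [List.getLast?_append_of_ne_nil _ hC] at hlast
  exact hgt (List.mem_of_getLast? hlast)

-- a list ending in a nonempty '>'-free block does not end in pvSigma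
lemma pvNoSigma_tail (M E : List Char) (hE : E ≠ []) (hgt : '>' ∉ E) :
    ¬ pvSigma <:+ (M ++ E) := by
  rintro ⟨v, hv⟩
  have h1 : (M ++ E).getLast? = E.getLast? := List.getLast?_append_of_ne_nil _ hE
  have h2 : (v ++ pvSigma).getLast? = some '>' := by
    rw [List.getLast?_append_of_ne_nil _ (by decide)]
    decide
  rw [hv] at h2
  rw [h1] at h2
  exact hgt (List.mem_of_getLast? h2)

-- spanHtml decomposes as prefix ++ content ++ "</span>"
lemma pvSpan_decomp (cor label : String) (valor : List Char) :
    ∃ w, spanHtml cor label valor = w ++ escapeHtml valor ++ "</span>".toList := by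
  refine ⟨"<span style=\"background-color:".toList ++ cor.toList ++
    ";color:#fff;padding:2px 6px;border-radius:4px;font-weight:bold\" title=\"".toList ++
    label.toList ++ "\">".toList, ?_⟩
  simp [spanHtml]

-- invariant carried by B's out list
def pvQ (L : List Char) : Prop :=
  L = [] ∨ ∃ w C, C ≠ [] ∧ '>' ∉ C ∧ L = w ++ C ++ "</span>".toList

-- terminal step of B's scan
lemma pvStopCase (text : List Char) (plain : Nat) (out : List (List Char)) (hq : pvQ out.flatten) :
    ¬ pvSigma <:+ (out ++ [escapeHtml (PySem.List.slice text (some (plain : Int)) none)]).flatten := by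
  rw [show PySem.List.slice text (some (plain : Int)) none = text.drop plain from
    PySem.List.slice_from_natCast text plain]
  rw [List.flatten_append]
  simp only [List.flatten_cons, List.flatten_nil, List.append_nil]
  by_cases hE : text.drop plain = []
  · rw [hE, pvEscape_nil, List.append_nil]
    rcases hq with hq | ⟨w, C, hC, hgt, hq⟩
    · rw [hq]
      rintro ⟨v, hv⟩
      have := congrArg List.length hv
      simp [pvSigma] at this
    · rw [hq]
      exact pvNoSigma_span w C hC hgt
  · exact pvNoSigma_tail _ _ (escapeHtml_ne_nil _ hE) (escapeHtml_gt_not_mem _)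

-- B's scan never produces output ending in pvSigma
lemma pvBScan_noSigma (text : List Char) (pats : List (List Char × String × String))
    (hp : ∀ p ∈ pats, p.1 ≠ []) :
    ∀ (i plain : Nat) (out : List (List Char)), pvQ out.flatten →
    ¬ pvSigma <:+ (bScan text pats hp i plain out).flatten := by
  suffices H : ∀ (fuel i plain : Nat) (out : List (List Char)), text.length - i ≤ fuel →
      pvQ out.flatten → ¬ pvSigma <:+ (bScan text pats hp i plain out).flatten by
    intro i plain out hq
    exact H text.length i plain out (by omega) hq
  intro fuel
  induction fuel with
  | zero =>
      intro i plain out hf hq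
      have hi : ¬ i < text.length := by omega
      rw [bScan_stop text pats hp i plain out hi]
      exact pvStopCase text plain out hq
  | succ fuel ih =>
      intro i plain out hf hq
      by_cases hi : i < text.length
      · cases hb : bestMatch text pats i with
        | none =>
            rw [bScan_none text pats hp i plain out hi hb]
            exact ih (i+1) plain out (by omega) hq
        | some p =>
            rw [bScan_some text pats hp i plain out p hi hb]
            apply ih _ _ _ (by
              have := hp p (bestMatch_mem hb)
              have : 0 < p.1.length := List.length_pos_iff.mpr this
              omega)
            right
            rcases pvSpan_decomp p.2.1 p.2.2 p.1 with ⟨w, hw⟩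
            refine ⟨out.flatten ++ escapeHtml (PySem.List.slice text (some (plain : Int)) (some (i : Int))) ++ w,
              escapeHtml p.1, escapeHtml_ne_nil _ (hp p (bestMatch_mem hb)), escapeHtml_gt_not_mem _, ?_⟩
            simp [List.flatten_append, hw]
      · rw [bScan_stop text pats hp i plain out hi]
        exact pvStopCase text plain out hq

-- property of every marcação A collects
def pvP (text : List Char) (m : Int × Int × String × List Char × String) : Prop :=
  ∃ (j : Nat) (v : List Char), j ≤ text.length ∧ v <+: text.drop j ∧
    m.1 = (j : Int) ∧ m.2.1 = (j : Int) + v.length ∧ m.2.2.2.1 = v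

lemma pvAF_mem_P (text : List Char) :
    ∀ (e : List (String × List String)) (acc : List (Int × Int × String × List Char × String)),
    (∀ m ∈ acc, pvP text m) →
    ∀ m ∈ e.foldl (fun acc tv =>
      if !(PySem.Dict.contains entityConfig tv.1) || tv.2.isEmpty then acc
      else tv.2.foldl (fun acc2 valor =>
        acc2 ++ occsA text valor.toList tv.1 (PySem.Dict.getD entityConfig tv.1 ("", "")).2 0) acc) acc,
    pvP text m := by
  intro e
  induction e with
  | nil => intro acc hacc; simpa using hacc
  | cons tv t ih =>
      intro acc hacc
      simp only [List.foldl_cons]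
      by_cases hc : (!(PySem.Dict.contains entityConfig tv.1) || tv.2.isEmpty) = true
      · rw [if_pos hc]; exact ih acc hacc
      · rw [if_neg hc]
        rw [PySem.List.foldl_append_eq_flatMap]
        apply ih
        intro m hm
        rcases List.mem_append.mp hm with hm | hm
        · exact hacc m hm
        · rcases List.mem_flatMap.mp hm with ⟨valor, _, hmo⟩
          rcases (occsA_mem text valor.toList tv.1 _ 0 le_rfl m).mp hmo with ⟨j, _, hj2, hj3, hj4⟩
          exact ⟨j, valor.toList, hj2, hj3, by rw [hj4], by rw [hj4], by rw [hj4]⟩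

lemma pvAF_mono (text : List Char) :
    ∀ (e : List (String × List String)) (acc : List (Int × Int × String × List Char × String))
      (m : Int × Int × String × List Char × String), m ∈ acc →
    m ∈ e.foldl (fun acc tv =>
      if !(PySem.Dict.contains entityConfig tv.1) || tv.2.isEmpty then acc
      else tv.2.foldl (fun acc2 valor =>
        acc2 ++ occsA text valor.toList tv.1 (PySem.Dict.getD entityConfig tv.1 ("", "")).2 0) acc) acc := by
  intro e
  induction e with
  | nil => intro acc m hm; simpa using hm
  | cons tv t ih =>
      intro acc m hm
      simp only [List.foldl_cons]
      by_cases hc : (!(PySem.Dict.contains entityConfig tv.1) || tv.2.isEmpty) = true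
      · rw [if_pos hc]; exact ih acc m hm
      · rw [if_neg hc]
        rw [PySem.List.foldl_append_eq_flatMap]
        exact ih _ m (List.mem_append_left _ hm)

lemma pvAF_mem_star (text : List Char) (p : String × List String)
    (hc : PySem.Dict.contains entityConfig p.1 = true) (hv : "" ∈ p.2) :
    ∀ (e : List (String × List String)) (acc : List (Int × Int × String × List Char × String)),
    p ∈ e →
    ((text.length : Int), (text.length : Int), p.1, ([] : List Char),
      (PySem.Dict.getD entityConfig p.1 ("", "")).2) ∈
    e.foldl (fun acc tv =>
      if !(PySem.Dict.contains entityConfig tv.1) || tv.2.isEmpty then acc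
      else tv.2.foldl (fun acc2 valor =>
        acc2 ++ occsA text valor.toList tv.1 (PySem.Dict.getD entityConfig tv.1 ("", "")).2 0) acc) acc := by
  intro e
  induction e with
  | nil => intro acc hp; simp at hp
  | cons tv t ih =>
      intro acc hp
      simp only [List.foldl_cons]
      rcases List.mem_cons.mp hp with heq | hp
      · have hne : ¬ tv.2.isEmpty = true := by
          rw [List.isEmpty_iff]
          intro h; rw [heq, h] at hv; simp at hv
        have hct : PySem.Dict.contains entityConfig tv.1 = true := by rw [← heq]; exact hc
        rw [if_neg (by simp [hct, hne])]
        rw [PySem.List.foldl_append_eq_flatMap]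
        apply pvAF_mono
        apply List.mem_append_right
        apply List.mem_flatMap.mpr
        rw [← heq]
        refine ⟨"", hv, ?_⟩
        apply (occsA_mem text "".toList p.1 _ 0 le_rfl _).mpr
        refine ⟨text.length, by positivity, le_rfl, by simp, by simp⟩
      · by_cases hcc : (!(PySem.Dict.contains entityConfig tv.1) || tv.2.isEmpty) = true
        · rw [if_pos hcc]; exact ih acc hp
        · rw [if_neg hcc]
          rw [PySem.List.foldl_append_eq_flatMap]
          exact ih _ hp

lemma pvSorted_fst_le (xs : List (Int × Int × String × List Char × String)) :
    (PySem.List.sorted2 xs (fun x => x.1) (fun x => -(x.2.1 - x.1)) false).Pairwise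
      (fun a b => a.1 ≤ b.1) := by
  have h := pvSorted2_S xs (fun x => x.1) (fun x => -(x.2.1 - x.1)) (fun _ _ => True)
    (List.pairwise_iff_getElem.mpr (fun _ _ _ _ _ => fun _ => trivial))
  apply h.imp
  intro a b hab
  have h1 := hab.1
  rw [pvSLt_false_iff] at h1
  omega

lemma pvGreedy_append (n : Int) (z : Int × Int × String × List Char × String) (hz : z.1 = n) :
    ∀ (l : List (Int × Int × String × List Char × String)) (u : Int), u ≤ n →
    (∀ m ∈ l, m.2.1 ≤ n) →
    pvGreedy (l ++ [z]) u = pvGreedy l u ++ [z] := by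
  intro l
  induction l with
  | nil =>
      intro u hu _
      simp only [List.nil_append, pvGreedy]
      rw [if_pos (by omega)]
  | cons m t ih =>
      intro u hu hb
      simp only [List.cons_append, pvGreedy]
      by_cases h : m.1 ≥ u
      · rw [if_pos h, if_pos h, ih m.2.1 (hb m (List.mem_cons_self ..))
          (fun x hx => hb x (List.mem_cons_of_mem _ hx))]
        rfl
      · rw [if_neg h, if_neg h, ih u hu (fun x hx => hb x (List.mem_cons_of_mem _ hx))]

lemma pvSpan_empty (cor label : String) :
    ∃ w, spanHtml cor label [] = w ++ pvSigma := by
  refine ⟨"<span style=\"background-color:".toList ++ cor.toList ++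
    ";color:#fff;padding:2px 6px;border-radius:4px;font-weight:bold\" title=\"".toList ++
    label.toList ++ ['"'], ?_⟩
  have h1 : escapeHtml [] = [] := pvEscape_nil
  have h2 : ("\">".toList : List Char) = ['"', '>'] := by decide
  have h3 : (pvSigma : List Char) = '>' :: "</span>".toList := by decide
  rw [spanHtml, h1, h2, h3]
  simp

-- ===== VERDICT (by name: the statement is the Claim_ definition above) =====
theorem gerar_html_highlight_spec : Claim_unchanged_gerar_html_highlight := by
  unfold Claim_unchanged_gerar_html_highlight
  intro texto entidades _hdom hpre
  unfold Spec_gerar_html_highlight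
  intro hD
  unfold Pre_gerar_html_highlight at hpre
  unfold D_gerar_html_highlight at hD
  unfold gerar_html_highlight gerar_html_highlight_alt
  dsimp only
  rw [pvMarcacoes_eq texto.toList entidades hD]
  have hpB : ∀ p ∈ (pvApats entidades).map pvForget, p.1 ≠ [] := by
    intro p hp
    rcases List.mem_map.mp hp with ⟨q, hq, rfl⟩
    have := pvApats_nonempty entidades q hq
    simpa [pvForget] using this
  have hbs : ∀ (l1 l2 : List (List Char × String × String)) (h1 : ∀ p ∈ l1, p.1 ≠ [])
      (h2 : ∀ p ∈ l2, p.1 ≠ []), l1 = l2 →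
      bScan texto.toList l1 h1 0 0 [] = bScan texto.toList l2 h2 0 0 [] := by
    intro l1 l2 h1 h2 heq
    subst heq
    rfl
  rw [hbs _ ((pvApats entidades).map pvForget) _ hpB (pvPatsB_eq entidades)]
  rw [pvJoin_flatten (bScan texto.toList ((pvApats entidades).map pvForget) hpB 0 0 [])]
  rw [pvRenderB texto.toList (pvApats entidades) (pvApats_nonempty entidades) hpB 0 0 []]
  simp only [List.flatten_nil, List.nil_append]
  by_cases hemp : (pvMarks texto.toList (pvApats entidades)).isEmpty = true
  · rw [if_pos hemp]
    have hsel : pvSelA texto.toList (pvApats entidades) (pvApats_nonempty entidades) 0 = [] := by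
      apply pvSelA_nil
      intro m hv _
      have hm := (pvMarks_mem texto.toList (pvApats entidades) m).mpr hv
      rw [List.isEmpty_iff.mp hemp] at hm
      simp at hm
    rw [hsel]
    simp [pvChunks]
  · rw [if_neg hemp]
    rw [pvJoin_flatten]
    rw [pvFoldl_filtradas]
    simp only [List.nil_append]
    have hKinj : ∀ q ∈ pvApats entidades, ∀ r ∈ pvApats entidades,
        (entidades.map Prod.fst).idxOf q.1 = (entidades.map Prod.fst).idxOf r.1 → q.1 = r.1 := by
      intro q hq r hr he
      have hqm := (pvApats_cfg entidades q hq).2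
      have hrm := (pvApats_cfg entidades r hr).2
      have h1 := List.getElem_idxOf (List.idxOf_lt_length_of_mem hqm)
      have h2 := List.getElem_idxOf (List.idxOf_lt_length_of_mem hrm)
      rw [← h1, ← h2]
      congr 1
    have hcfg2 : ∀ q ∈ pvApats entidades, ∀ r ∈ pvApats entidades,
        q.1 = r.1 → q.2.2 = r.2.2 := by
      intro q hq r hr he
      have h1 := (pvApats_cfg entidades q hq).1
      have h2 := (pvApats_cfg entidades r hr).1
      rw [he] at h1
      rw [h1] at h2
      have h4 : q.2.2.2 = r.2.2.2 ∧ q.2.2.1 = r.2.2.1 := by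
        have h3 := Option.some_inj.mp h2
        exact ⟨congrArg Prod.fst h3, congrArg Prod.snd h3⟩
      exact Prod.ext h4.2 h4.1
    have hS : (PySem.List.sorted2 (pvMarks texto.toList (pvApats entidades))
        (fun x => x.1) (fun x => -(x.2.1 - x.1)) false).Pairwise
        (pvSRel (fun m => m.1) (fun m => -(m.2.1 - m.1))
          (fun a b => (entidades.map Prod.fst).idxOf a.2.2.1 ≤ (entidades.map Prod.fst).idxOf b.2.2.1)) := by
      apply pvSorted2_S
      refine (pvMarks_pairwise_K texto.toList entidades hpre).imp ?_
      intro a b h _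
      exact h
    have hperm := PySem.List.sorted2_perm (pvMarks texto.toList (pvApats entidades))
      (fun x => x.1) (fun x => -(x.2.1 - x.1)) false
    have hg := pvGreedy_main texto.toList (pvApats entidades)
      (fun t => (entidades.map Prod.fst).idxOf t) (pvApats_nonempty entidades)
      (pvApats_pairwise_K entidades hpre) hKinj hcfg2
      (PySem.List.sorted2 (pvMarks texto.toList (pvApats entidades))
        (fun x => x.1) (fun x => -(x.2.1 - x.1)) false)
      hS
      (fun m hm => (pvMarks_mem _ _ m).mp (hperm.mem_iff.mp hm))
      0
      (fun m hv _ => hperm.mem_iff.mpr ((pvMarks_mem _ _ m).mpr hv))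
    simp only [Nat.cast_zero] at hg
    rw [hg]
    have hlab : ∀ q ∈ pvApats entidades,
        (PySem.Dict.getD entityConfig q.1 ("", "")).1 = q.2.2.2 := by
      intro q hq
      have h1 := (pvApats_cfg entidades q hq).1
      simp [PySem.Dict.getD, h1]
    have hr := pvRenderA texto.toList (pvApats entidades) (pvApats_nonempty entidades) hlab 0 0 []
    simp only [Nat.cast_zero] at hr
    simp only [List.flatten_nil, List.nil_append] at hr
    rw [hr]

set_option maxRecDepth 16384 in
theorem gerar_html_highlight_changed : Claim_changed_gerar_html_highlight := by
  unfold Claim_changed_gerar_html_highlight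
  unfold pvDiffWitness_gerar_html_highlight pvDiffWitnessOut_gerar_html_highlight
  refine ⟨by decide, by decide, by decide, ?_, ?_, by decide⟩
  · -- A on the witness
    have h1 : PySem.Chars.findFrom "a".toList ([] : List Char) 0 none = 0 := by decide
    have h2 : PySem.Chars.findFrom "a".toList ([] : List Char) (0 + 1) none = 1 := by decide
    have h3 : PySem.Chars.findFrom "a".toList ([] : List Char) (1 + 1) none = -1 := by decide
    have e2 : occsA "a".toList ([] : List Char) "cpf" "#FF4444" (1 + 1) = [] := by
      rw [occsA.eq_def]
      dsimp only
      rw [h3, dif_pos rfl]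
    have e1 : occsA "a".toList ([] : List Char) "cpf" "#FF4444" (0 + 1)
        = [(1, 1, "cpf", ([] : List Char), "#FF4444")] := by
      rw [occsA.eq_def]
      dsimp only
      rw [h2, dif_neg (by decide), e2]
      norm_num
    have e0 : occsA "a".toList ([] : List Char) "cpf" "#FF4444" 0
        = [(0, 0, "cpf", ([] : List Char), "#FF4444"), (1, 1, "cpf", ([] : List Char), "#FF4444")] := by
      rw [occsA.eq_def]
      dsimp only
      rw [h1, dif_neg (by decide), e1]
      norm_num
    unfold gerar_html_highlight
    simp only [List.foldl_cons, List.foldl_nil]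
    norm_num [show PySem.Dict.contains entityConfig "cpf" = true from by decide,
      show (PySem.Dict.getD entityConfig "cpf" ("", "")).2 = "#FF4444" from by decide]
    rw [e0]
    decide
  · -- B on the witness
    have h0 : ∀ p ∈ ([] : List (List Char × String × String)), p.1 ≠ [] := by simp
    have hbsw : ∀ (l1 : List (List Char × String × String)) (h1 : ∀ p ∈ l1, p.1 ≠ [])
        (heq : l1 = []),
        bScan "a".toList l1 h1 0 0 [] = bScan "a".toList [] h0 0 0 [] := by
      intro l1 h1 heq
      subst heq
      rfl
    unfold gerar_html_highlight_alt
    dsimp only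
    rw [hbsw _ _ (by decide)]
    rw [bScan_none "a".toList [] h0 0 0 [] (by decide) (by decide)]
    rw [bScan_stop "a".toList [] h0 (0 + 1) 0 [] (by decide)]
    decide

theorem gerar_html_highlight_tight : Claim_exact_gerar_html_highlight := by
  unfold Claim_exact_gerar_html_highlight
  intro texto entidades _hdom _hpre hD hEq
  unfold D_gerar_html_highlight at hD
  obtain ⟨p, hpmem, hc, hv⟩ := hD
  -- B's output never ends with pvSigma
  have htl : ∀ L : List Char, (String.ofList L).toList = L := by intro L; simp
  have hB : ¬ pvSigma <:+ (gerar_html_highlight_alt texto entidades).toList := by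
    unfold gerar_html_highlight_alt
    dsimp only
    rw [htl, pvJoin_flatten]
    exact pvBScan_noSigma _ _ _ 0 0 [] (Or.inl rfl)
  -- A's output ends with pvSigma
  have hA : pvSigma <:+ (gerar_html_highlight texto entidades).toList := by
    unfold gerar_html_highlight
    dsimp only
    set text := texto.toList with htext
    set M := entidades.foldl (fun acc tv =>
      if !(PySem.Dict.contains entityConfig tv.1) || tv.2.isEmpty then acc
      else tv.2.foldl (fun acc2 valor =>
        acc2 ++ occsA text valor.toList tv.1 (PySem.Dict.getD entityConfig tv.1 ("", "")).2 0) acc)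
      [] with hM
    have hstar : ((text.length : Int), (text.length : Int), p.1, ([] : List Char),
        (PySem.Dict.getD entityConfig p.1 ("", "")).2) ∈ M :=
      pvAF_mem_star text p hc hv entidades [] hpmem
    have hMP : ∀ m ∈ M, pvP text m := pvAF_mem_P text entidades [] (by simp)
    have hMne : ¬ M.isEmpty = true := by
      rw [List.isEmpty_iff]
      intro h; rw [h] at hstar; simp at hstar
    rw [if_neg hMne, htl, pvJoin_flatten, pvFoldl_filtradas]
    simp only [List.nil_append]
    have hperm := PySem.List.sorted2_perm M (fun x => x.1) (fun x => -(x.2.1 - x.1)) false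
    have hpw := pvSorted_fst_le M
    rcases List.eq_nil_or_concat (PySem.List.sorted2 M (fun x => x.1) (fun x => -(x.2.1 - x.1)) false)
      with hnil | ⟨l', z, hsplit⟩
    · exfalso
      have := hperm.symm.mem_iff.mp hstar
      rw [hnil] at this
      simp at this
    rw [List.concat_eq_append] at hsplit
    have hzmem : z ∈ M := hperm.mem_iff.mp (by rw [hsplit]; simp)
    have hzP := hMP z hzmem
    obtain ⟨jz, vz, hjz, hvz, hz1, hz2, hz3⟩ := hzP
    -- every element of l' has first component ≤ z.1, and the star mark is in the list
    have hz1n : z.1 = (text.length : Int) := by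
      have hstar' := hperm.symm.mem_iff.mp hstar
      rw [hsplit] at hstar'
      rcases List.mem_append.mp hstar' with hs | hs
      · have hpw' := hpw
        rw [hsplit] at hpw'
        have h2 := (List.pairwise_append.mp hpw').2.2
        have h3 := h2 _ hs z (List.mem_cons_self ..)
        simp only at h3
        omega
      · simp only [List.mem_singleton] at hs
        rw [← hs]
    have hjzn : jz = text.length := by omega
    subst hjzn
    have hvznil : vz = [] := by
      rw [List.drop_length] at hvz
      exact List.prefix_nil.mp hvz
    subst hvznil
    have hz2n : z.2.1 = (text.length : Int) := by rw [hz2]; simp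
    have hbound : ∀ m ∈ l', m.2.1 ≤ (text.length : Int) := by
      intro m hm
      have hmM : m ∈ M := hperm.mem_iff.mp (by rw [hsplit]; exact List.mem_append_left _ hm)
      obtain ⟨j, v, hj, hvp, h1, h2, h3⟩ := hMP m hmM
      have hlen : v.length ≤ text.length - j := by
        have := hvp.length_le
        simpa using this
      rw [h2]
      push_cast
      omega
    rw [hsplit, pvGreedy_append (text.length : Int) z hz1n l' 0 (by positivity) hbound]
    rw [List.foldl_append]
    simp only [List.foldl_cons, List.foldl_nil]
    rw [hz2n, hz3]
    rw [if_neg (lt_irrefl _)]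
    rcases pvSpan_empty z.2.2.2.2 (PySem.Dict.getD entityConfig z.2.2.1 ("", "")).1 with ⟨w, hw⟩
    rw [hw]
    rw [List.flatten_append]
    simp only [List.flatten_cons, List.flatten_nil, List.append_nil]
    exact ⟨_ ++ w, by rw [List.append_assoc]⟩
  rw [hEq] at hA
  exact hB hA
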